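-- pv_equiv track=rewrite | github.com/toandnh/foobar.withgoogle | foobar.withgoogle/Extras/Expanding Nebula/solution.py | solution
-- ===== SOURCE A (Python) =====
-- def solution(g):
--     grid = {}
--
--     for i in range(len(g[0])):
--         if i == 0:
--             for col in generate_cols(g, i):
--                 if col[1] in grid:
--                     grid[col[1]] = grid.get(col[1]) + 1
--                     continue
--                 grid[col[1]] = 1
--             continue
--
--         cols = {}
--         for col in generate_cols(g, i):
--             if col[0] in cols:
--                 cols.get(col[0]).append(col[1])
--                 continue
--             cols[col[0]] = [col[1]]
--         temp_grid = {}
--         for key, value in grid.items():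
--             if key in cols:
--                 for col_value in cols.get(key):
--                     if col_value in temp_grid:
--                         temp_grid[col_value] = temp_grid.get(col_value) + value
--                         continue
--                     temp_grid[col_value] = value
--         grid = temp_grid
--
--     return sum(grid.get(key) for key, _ in grid.items())
--
-- def generate_cols(g, index_col):
--     cols = {}
--
--     for i in range(len(g)):
--         if i == 0:
--             for block in get_blocks(not g[i][index_col]):
--                 temp_list = []
--                 temp_list.append(block[2])
--                 temp_list.append(block[3])
--                 if block[1] in cols:
--                     cols.get(block[1]).append(temp_list)
--                     continue
--                 cols[block[1]] = [temp_list]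
--             continue
--
--         blocks = {}
--         for block in get_blocks(not g[i][index_col]):
--             if block[0] in blocks:
--                 blocks.get(block[0]).append(block[1])
--                 continue
--             blocks[block[0]] = [block[1]]
--         temp_cols = {}
--         for key, values in cols.items():
--             if key in blocks:
--                 for value in values:
--                     for block_value in blocks.get(key):
--                         temp_list = updated_values(value, block_value)
--                         if block_value in temp_cols:
--                             temp_cols.get(block_value).append(temp_list)
--                             continue
--                         temp_cols[block_value] = [temp_list]
--         cols = temp_cols
--
--     return [col for _, values in cols.items() for col in values]
--
-- def updated_values(values, value):
--     return [values[0] * 2 + dict.get(value)[0], values[1] * 2 + dict.get(value)[1]]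
--
-- def get_blocks(empty):
--     return EMPTY_BLOCK if empty else HAS_GAS_BLOCK
--
-- dict = {
--     0 : (0, 0),
--     1 : (0, 1),
--     2 : (1, 0),
--     3 : (1, 1)
-- }
--
-- HAS_GAS_BLOCK = ((0, 1, 0, 1), (0, 2, 1, 0), (1, 0, 0, 2), (2, 0, 2, 0))
--
-- EMPTY_BLOCK = ((0, 0, 0, 0), (3, 3, 3, 3), (3, 0, 2, 2), (2, 2, 3, 0), (2, 1, 2, 1), (1, 2, 1, 2), (1, 1, 0, 3), (0, 3, 1, 1), (3, 2, 3, 2), (3, 1, 2, 3), (2, 3, 3, 1), (1, 3, 1, 3))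
-- ===== SOURCE B (Python) =====
-- def solution(g):
--     h = len(g)
--     n = 1 << (h + 1)
--     # target columns packed as integers, bit i = g[i][j]
--     cols = [sum(1 << i for i in range(h) if g[i][j]) for j in range(len(g[0]))]
--     # one global table: every predecessor-column pair (a, b), grouped by the
--     # target column it produces under the exactly-one-of-four gas rule
--     pairs = {}
--     for a in range(n):
--         for b in range(n):
--             c = 0
--             for i in range(h):
--                 if ((a >> i) & 1) + ((a >> (i + 1)) & 1) + ((b >> i) & 1) + ((b >> (i + 1)) & 1) == 1:
--                     c |= 1 << i
--             pairs.setdefault(c, []).append((a, b))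
--     # dense count vector over predecessor-column masks
--     vec = [1] * n
--     for c in cols:
--         new = [0] * n
--         for a, b in pairs.get(c, []):
--             new[b] += vec[a]
--         vec = new
--     return sum(vec)
-- ===== Notes on version B (the rewrite author's own statement) =====
-- stated objective: alternative
-- what changed: A generates valid predecessor-column pairs per target column on the fly, chaining 2x2 block tables through dict-of-lists grouping and regrouping keyed by 2-bit state codes; B packs each target column into one integer, precomputes a single global table grouping every predecessor-column pair (a,b) by the packed column it produces under the exactly-one-of-four rule, and then runs the width loop as dense count-vector updates indexed by column mask, with no per-column generation and no dicts of value lists.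
-- outside the precondition, e.g. on solution([[]]): A returns 0, B returns 4; on solution([[], [True]]): A returns 0, B returns 8; on solution([]): A raises IndexError, B raises IndexError
import Mathlib
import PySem

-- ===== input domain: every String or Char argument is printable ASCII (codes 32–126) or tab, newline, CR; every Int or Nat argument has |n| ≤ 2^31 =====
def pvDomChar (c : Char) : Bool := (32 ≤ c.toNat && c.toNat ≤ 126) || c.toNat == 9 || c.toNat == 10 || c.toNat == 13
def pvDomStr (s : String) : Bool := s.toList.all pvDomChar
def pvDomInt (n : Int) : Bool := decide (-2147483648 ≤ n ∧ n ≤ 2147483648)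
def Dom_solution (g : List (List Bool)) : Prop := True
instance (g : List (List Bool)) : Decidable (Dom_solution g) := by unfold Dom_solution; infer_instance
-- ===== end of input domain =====

-- B replaces A's per-column block-pair generation by a precomputed global table: every
-- predecessor-column pair, grouped by the packed target column it produces, then a dense
-- count-vector DP over the target columns (alternative organisation, not faster: the
-- table costs Theta(4^(h+1) * h) regardless of the grid).

-- ===== PORT A =====
-- the module-level table 'dict': code -> (x-bit, y-bit)
def pvCodeDict : PySem.Dict Int (Int × Int) :=
  PySem.Dict.ofList [(0, (0, 0)), (1, (0, 1)), (2, (1, 0)), (3, (1, 1))]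

def HAS_GAS_BLOCK : List (Int × Int × Int × Int) :=
  [(0, 1, 0, 1), (0, 2, 1, 0), (1, 0, 0, 2), (2, 0, 2, 0)]

def EMPTY_BLOCK : List (Int × Int × Int × Int) :=
  [(0, 0, 0, 0), (3, 3, 3, 3), (3, 0, 2, 2), (2, 2, 3, 0), (2, 1, 2, 1), (1, 2, 1, 2),
   (1, 1, 0, 3), (0, 3, 1, 1), (3, 2, 3, 2), (3, 1, 2, 3), (2, 3, 3, 1), (1, 3, 1, 3)]

def get_blocks (empty : Bool) : List (Int × Int × Int × Int) :=
  if empty then EMPTY_BLOCK else HAS_GAS_BLOCK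

-- dict.get(value)[0]/[1]: the key is always one of the codes 0..3 at A's call sites, so the
-- .getD default is never taken
def updated_values (values : Int × Int) (value : Int) : Int × Int :=
  let bits := (PySem.Dict.get? pvCodeDict value).getD (0, 0)
  (values.1 * 2 + bits.1, values.2 * 2 + bits.2)

-- g[i][index_col]; always in range when Pre_solution holds (out of range = IndexError, excluded)
def pvCell (g : List (List Bool)) (i j : Int) : Bool :=
  PySem.List.pyGetD (PySem.List.pyGetD g i []) j false

def generate_cols (g : List (List Bool)) (index_col : Int) : List (Int × Int) :=
  let cols : PySem.Dict Int (List (Int × Int)) :=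
    (PySem.List.pyRange 0 (g.length : Int) 1).foldl (fun cols i =>
      if i == 0 then
        (get_blocks (! pvCell g i index_col)).foldl (fun cols block =>
          let temp_list := (block.2.2.1, block.2.2.2)
          if cols.contains block.2.1 then
            cols.insert block.2.1 (cols.getD block.2.1 [] ++ [temp_list])
          else
            cols.insert block.2.1 [temp_list]) cols
      else
        let blocks : PySem.Dict Int (List Int) :=
          (get_blocks (! pvCell g i index_col)).foldl (fun blocks block =>
            if blocks.contains block.1 then
              blocks.insert block.1 (blocks.getD block.1 [] ++ [block.2.1])
            else
              blocks.insert block.1 [block.2.1]) PySem.Dict.empty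
        let temp_cols : PySem.Dict Int (List (Int × Int)) :=
          cols.items.foldl (fun temp_cols kv =>
            match blocks.get? kv.1 with
            | none => temp_cols
            | some bvs =>
              kv.2.foldl (fun temp_cols value =>
                bvs.foldl (fun temp_cols block_value =>
                  let temp_list := updated_values value block_value
                  if temp_cols.contains block_value then
                    temp_cols.insert block_value (temp_cols.getD block_value [] ++ [temp_list])
                  else
                    temp_cols.insert block_value [temp_list]) temp_cols) temp_cols) PySem.Dict.empty
        temp_cols) PySem.Dict.empty
  cols.items.foldl (fun acc kv => acc ++ kv.2) []

-- len(g[0]) raises IndexError on g = [] in Python: excluded by Pre_solution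
def solution (g : List (List Bool)) : Int :=
  let grid : PySem.Dict Int Int :=
    (PySem.List.pyRange 0 ((PySem.List.pyGetD g 0 []).length : Int) 1).foldl (fun grid i =>
      if i == 0 then
        (generate_cols g i).foldl (fun grid col =>
          if grid.contains col.2 then
            grid.insert col.2 (grid.getD col.2 0 + 1)
          else
            grid.insert col.2 1) grid
      else
        let cols : PySem.Dict Int (List Int) :=
          (generate_cols g i).foldl (fun cols col =>
            if cols.contains col.1 then
              cols.insert col.1 (cols.getD col.1 [] ++ [col.2])
            else
              cols.insert col.1 [col.2]) PySem.Dict.empty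
        let temp_grid : PySem.Dict Int Int :=
          grid.items.foldl (fun temp_grid kv =>
            match cols.get? kv.1 with
            | none => temp_grid
            | some vs =>
              vs.foldl (fun temp_grid col_value =>
                if temp_grid.contains col_value then
                  temp_grid.insert col_value (temp_grid.getD col_value 0 + kv.2)
                else
                  temp_grid.insert col_value kv.2) temp_grid) PySem.Dict.empty
        temp_grid) PySem.Dict.empty
  grid.items.foldl (fun s kv => s + grid.getD kv.1 0) 0

-- ===== PORT B =====
-- Source B; loop variables a, b, i come from range(..) so they are nonnegative and the list
-- indices a, b are always in range [0, n): '.toNat' indexing and 'List.set' are exact here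
def solution_alt (g : List (List Bool)) : Int :=
  let h := g.length
  let n : Int := (1 : Int) <<< (h + 1)
  let cols : List Int :=
    (PySem.List.pyRange 0 ((PySem.List.pyGetD g 0 []).length : Int) 1).map (fun j =>
      (PySem.List.pyRange 0 (h : Int) 1).foldl (fun s i =>
        if PySem.List.pyGetD (PySem.List.pyGetD g i []) j false then s + ((1 : Int) <<< i.toNat)
        else s) 0)
  let pairs : PySem.Dict Int (List (Int × Int)) :=
    (PySem.List.pyRange 0 n 1).foldl (fun pairs a =>
      (PySem.List.pyRange 0 n 1).foldl (fun pairs b =>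
        let c :=
          (PySem.List.pyRange 0 (h : Int) 1).foldl (fun c i =>
            if (PySem.Int.band (a >>> i.toNat) 1 + PySem.Int.band (a >>> (i.toNat + 1)) 1
                + PySem.Int.band (b >>> i.toNat) 1 + PySem.Int.band (b >>> (i.toNat + 1)) 1 == 1) then
              PySem.Int.bor c ((1 : Int) <<< i.toNat)
            else c) 0
        if pairs.contains c then pairs.insert c (pairs.getD c [] ++ [(a, b)])
        else pairs.insert c [(a, b)]) pairs) PySem.Dict.empty
  let vec0 : List Int := List.replicate n.toNat 1
  let vec :=
    cols.foldl (fun vec c =>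
      (pairs.getD c []).foldl (fun new ab =>
        new.set ab.2.toNat (new.getD ab.2.toNat 0 + vec.getD ab.1.toNat 0))
        (List.replicate n.toNat 0)) vec0
  vec.sum

-- ===== PRECONDITION & SPEC =====
-- Pre_ excludes: g = [] and grids with a row shorter than the first (Python A raises IndexError
-- there), and the degenerate zero-width first row (g[0] = []), a shape the puzzle never presents,
-- on which A's 0 and B's count of all 2^(h+1) single-column predecessors are both defensible.
def Pre_solution (g : List (List Bool)) : Prop :=
  g ≠ [] ∧ g.headD [] ≠ [] ∧ ∀ r ∈ g, (g.headD []).length ≤ r.length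

instance (g : List (List Bool)) : Decidable (Pre_solution g) := by
  unfold Pre_solution; infer_instance

def pvWitness_solution : List (List Bool) := [[true], [false]]

def Spec_solution (g : List (List Bool)) (out : Int) : Prop := out = solution_alt g
instance (g : List (List Bool)) (out : Int) : Decidable (Spec_solution g out) := by
  unfold Spec_solution; infer_instance

-- ===== CLAIM (what is proved, stated in full; the proofs are below) =====
def Claim_equal_solution : Prop :=
  ∀ (g : List (List Bool)), Dom_solution g → Pre_solution g → Spec_solution g (solution g)

-- ===== LEMMAS AND PROOFS =====

-- ---- proof-side semantic definitions ----

-- bit k of x (nonnegative x), as an Int 0/1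
def pvTb (x : Int) (k : Nat) : Int := if x.toNat.testBit k then 1 else 0

-- the 2x2-window gas rule: cell c iff exactly one of the four bits is set
def pvWin (x y : Int) (i j : Nat) (c : Bool) : Bool :=
  decide (pvTb x i + pvTb x j + pvTb y i + pvTb y j = 1) == c

def pvBound (x : Int) (w : Nat) : Bool := decide (0 ≤ x ∧ x < 2 ^ w)

-- column j of the target grid, cells read the way both ports read them
def pvColL (g : List (List Bool)) (j : Int) : List Bool :=
  g.map (fun r => PySem.List.pyGetD r j false)

-- A-side validity: x, y are (c.length+1)-bit masks, MSB = row 0, all windows match c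
def pvAval (c : List Bool) (x y : Int) : Bool :=
  pvBound x (c.length + 1) && pvBound y (c.length + 1) &&
  (List.range c.length).all (fun r => pvWin x y (c.length - r) (c.length - 1 - r) (c.getD r false))

-- B-side validity: LSB = row 0
def pvBval (c : List Bool) (a b : Int) : Bool :=
  pvBound a (c.length + 1) && pvBound b (c.length + 1) &&
  (List.range c.length).all (fun i => pvWin a b i (i + 1) (c.getD i false))

-- the 2-bit state code A keys its dicts by: last produced bits of the two masks
def pvCode (x y : Int) : Int := 2 * pvTb x 0 + pvTb y 0

-- which (state, next-state) transitions A's block tables encode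
def pvOkb (e : Bool) (s s' : Int) : Bool :=
  pvBound s 2 && pvBound s' 2 &&
  (decide (pvTb s 1 + pvTb s 0 + pvTb s' 1 + pvTb s' 0 = 1) == !e)

-- reversal of the low w bits
def pvRev : Nat → Nat → Nat
  | 0, _ => 0
  | w + 1, m => pvRev w (m / 2) + m % 2 * 2 ^ w

-- ---- generic fold/dict helpers ----

-- the 'if key in d: append else: start a list' grouping loop, on (key, value) pairs
def pvGroupL {α : Type} (l : List (Int × α)) (d : PySem.Dict Int (List α)) :
    PySem.Dict Int (List α) :=
  l.foldl (fun d p =>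
    if d.contains p.1 then d.insert p.1 (d.getD p.1 [] ++ [p.2]) else d.insert p.1 [p.2]) d

-- the 'd[k] = d.get(k, 0) + v' accumulation loop, on (key, weight) pairs
def pvAccW (l : List (Int × Int)) (d : PySem.Dict Int Int) : PySem.Dict Int Int :=
  l.foldl (fun d p =>
    if d.contains p.1 then d.insert p.1 (d.getD p.1 0 + p.2) else d.insert p.1 p.2) d

theorem pvGroupL_eq_modify {α : Type} (l : List (Int × α)) (d : PySem.Dict Int (List α)) :
    pvGroupL l d = l.foldl (fun d p => d.modify p.1 [] (fun s => s ++ [p.2])) d := by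
  unfold pvGroupL
  refine PySem.List.foldl_congr_mem _ _ _ _ ?_
  intro acc p _
  by_cases h : acc.contains p.1
  · simp [h, PySem.Dict.modify]
  · have h' : acc.contains p.1 = false := by simpa using h
    simp [h', PySem.Dict.modify, PySem.Dict.getD_of_not_contains _ _ h']

theorem pvGroupL_getD {α : Type} (l : List (Int × α)) (d : PySem.Dict Int (List α)) (k : Int) :
    (pvGroupL l d).getD k [] = d.getD k [] ++ (l.filter (fun p => p.1 == k)).map (fun p => p.2) := by
  rw [pvGroupL_eq_modify]
  exact PySem.Dict.getD_foldl_modify_append l d k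

theorem pvGroupL_nodup {α : Type} (l : List (Int × α)) (d : PySem.Dict Int (List α))
    (h : d.keys.Nodup) : (pvGroupL l d).keys.Nodup := by
  rw [pvGroupL_eq_modify]
  exact PySem.Dict.nodup_keys_foldl_modify_key l (fun p => p.1) [] (fun _ p s => s ++ [p.2]) d h

theorem pvAccW_eq_insert (l : List (Int × Int)) (d : PySem.Dict Int Int) :
    pvAccW l d = l.foldl (fun d p => d.insert p.1 (d.getD p.1 0 + p.2)) d := by
  unfold pvAccW
  refine PySem.List.foldl_congr_mem _ _ _ _ ?_
  intro acc p _
  by_cases h : acc.contains p.1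
  · simp [h]
  · have h' : acc.contains p.1 = false := by simpa using h
    simp [h', PySem.Dict.getD_of_not_contains _ _ h']

theorem pvAccW_getD (l : List (Int × Int)) (d : PySem.Dict Int Int) (k : Int) :
    (pvAccW l d).getD k 0 = d.getD k 0 + ((l.filter (fun p => p.1 == k)).map (fun p => p.2)).sum := by
  rw [pvAccW_eq_insert]
  induction l generalizing d with
  | nil => simp
  | cons p rest ih =>
    rw [List.foldl_cons, ih]
    by_cases hk : p.1 = k
    · subst hk
      simp [PySem.Dict.getD_insert_self]
      ring
    · rw [PySem.Dict.getD_insert_of_ne _ _ _ (show k ≠ p.1 from fun h => hk h.symm)]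
      simp [hk]

theorem pvAccW_nodup (l : List (Int × Int)) (d : PySem.Dict Int Int)
    (h : d.keys.Nodup) : (pvAccW l d).keys.Nodup := by
  rw [pvAccW_eq_insert]
  exact PySem.Dict.nodup_keys_foldl_insert_key l (fun p => p.1)
    (fun d p => d.getD p.1 0 + p.2) d h

theorem pvAccW_mem_keys (l : List (Int × Int)) (d : PySem.Dict Int Int) (k : Int)
    (h : k ∈ (pvAccW l d).keys) : k ∈ d.keys ∨ k ∈ l.map (fun p => p.1) := by
  rw [pvAccW_eq_insert] at h
  rw [PySem.Dict.keys_foldl_insert_key l (fun p => p.1) (fun d p => d.getD p.1 0 + p.2) d] at h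
  exact (PySem.Set.mem_update _ _ _).mp h

-- ---- counting helpers ----

theorem pv_count_flatMap {α β : Type} [BEq β] (l : List α) (f : α → List β) (b : β) :
    (l.flatMap f).count b = (l.map (fun x => (f x).count b)).sum := by
  induction l with
  | nil => simp
  | cons x xs ih => simp [List.flatMap_cons, List.count_append, ih]

theorem pv_count_filter_map {α : Type} [BEq α] [LawfulBEq α]
    (S : List (Int × α)) (k : Int) (v : α) :
    ((S.filter (fun p => p.1 == k)).map (fun p => p.2)).count v = S.count (k, v) := by
  induction S with
  | nil => simp
  | cons p rest ih =>
    by_cases hk : p.1 = k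
    · by_cases hv : p.2 = v
      · have : p = (k, v) := by cases p; simp_all
        simp [List.filter_cons, hk, List.count_cons, this, ih]
      · have : ¬ (p = (k, v)) := by cases p; simp_all
        simp [List.filter_cons, hk, List.count_cons, hv, this, ih]
    · have : ¬ (p = (k, v)) := by cases p; simp_all
      simp [List.filter_cons, hk, List.count_cons, this, ih]

theorem pv_count_map {α β : Type} [BEq β] (l : List α) (f : α → β) (z : β) :
    (l.map f).count z = l.countP (fun a => f a == z) := by
  induction l with
  | nil => simp
  | cons x xs ih => simp [List.count_cons, List.countP_cons, ih]

theorem pv_countP_congr {α : Type} (l : List α) (q q' : α → Bool)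
    (h : ∀ v ∈ l, q v = q' v) : l.countP q = l.countP q' := by
  induction l with
  | nil => simp
  | cons x xs ih =>
    simp [List.countP_cons, h x (by simp), ih (fun v hv => h v (by simp [hv]))]

theorem pv_countP_eq_count {α : Type} [BEq α] (l : List α) (q : α → Bool) (v0 : α)
    (h : ∀ v, q v = (v == v0)) : l.countP q = l.count v0 := by
  unfold List.count
  exact pv_countP_congr l q _ (fun v _ => h v)

theorem pv_sum_map_indicator {M : Type} [AddCommMonoid M] (l : List Int) (F : Int → M) (k0 : Int)
    (h : ∀ k, k ≠ k0 → F k = 0) (hnd : l.Nodup) :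
    (l.map F).sum = if k0 ∈ l then F k0 else 0 := by
  induction l with
  | nil => simp
  | cons x xs ih =>
    have hnd' := hnd.of_cons
    by_cases hx : x = k0
    · subst hx
      have : x ∉ xs := (List.nodup_cons.mp hnd).1
      have hz : (xs.map F).sum = 0 := by
        rw [ih hnd']
        simp [this]
      simp [hz]
    · have hne : ¬ k0 = x := fun hh => hx hh.symm
      simp [List.map_cons, ih hnd', h x hx, hne]

-- ---- A's block tables encode exactly the gas rule on 2-bit state codes ----

def pvBlocksD (e : Bool) : PySem.Dict Int (List Int) :=
  pvGroupL ((get_blocks e).map (fun b => (b.1, b.2.1))) PySem.Dict.empty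

theorem pvTb_cases (x : Int) (k : Nat) : pvTb x k = 0 ∨ pvTb x k = 1 := by
  unfold pvTb; split <;> simp

theorem pvBlocksD_count (e : Bool) (s s' : Int) :
    ((pvBlocksD e).getD s []).count s' = if pvOkb e s s' then 1 else 0 := by
  unfold pvBlocksD
  rw [pvGroupL_getD, PySem.Dict.getD_empty, List.nil_append, pv_count_filter_map]
  by_cases hs : 0 ≤ s ∧ s < 4
  · by_cases hs' : 0 ≤ s' ∧ s' < 4
    · obtain ⟨h1, h2⟩ := hs
      obtain ⟨h3, h4⟩ := hs'
      cases e <;> (interval_cases s <;> interval_cases s' <;> decide)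
    · have hb : pvBound s' 2 = false := by
        unfold pvBound
        simpa using (by omega : ¬ (0 ≤ s' ∧ s' < 2 ^ 2))
      have hR : pvOkb e s s' = false := by
        unfold pvOkb
        rw [hb]
        simp
      rw [hR, if_neg (by simp), List.count_eq_zero]
      cases e <;> (intro hmem; simp [get_blocks, EMPTY_BLOCK, HAS_GAS_BLOCK, Prod.ext_iff] at hmem <;> omega)
  · have hb : pvBound s 2 = false := by
      unfold pvBound
      simpa using (by omega : ¬ (0 ≤ s ∧ s < 2 ^ 2))
    have hR : pvOkb e s s' = false := by
      unfold pvOkb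
      rw [hb]
      simp
    rw [hR, if_neg (by simp), List.count_eq_zero]
    cases e <;> (intro hmem; simp [get_blocks, EMPTY_BLOCK, HAS_GAS_BLOCK, Prod.ext_iff] at hmem <;> omega)

-- ---- bit arithmetic ----

theorem pvTb_succ (a r : Int) (hr : r = 0 ∨ r = 1) (k : Nat) :
    pvTb (2*a + r) (k+1) = pvTb a k := by
  unfold pvTb
  congr 1
  by_cases ha : 0 ≤ a
  · have h1 : (2*a + r).toNat = 2 * a.toNat + r.toNat := by rcases hr with h | h <;> omega
    rw [h1, Nat.testBit_add_one]
    have h2 : (2 * a.toNat + r.toNat) / 2 = a.toNat := by rcases hr with h | h <;> omega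
    rw [h2]
  · have h1 : (2*a + r).toNat = 0 := by rcases hr with h | h <;> omega
    have h2 : a.toNat = 0 := by omega
    simp [h1, h2]

theorem pvTb_zero (a r : Int) (hr : r = 0 ∨ r = 1) (ha : 0 ≤ a) :
    pvTb (2*a + r) 0 = r := by
  unfold pvTb
  rw [Nat.testBit_zero]
  by_cases hbit : (2*a + r).toNat % 2 = 1 <;> simp [hbit] <;> rcases hr with h | h <;> omega

theorem pvTb_emod (x : Int) (hx : 0 ≤ x) : pvTb x 0 = x % 2 := by
  unfold pvTb
  rw [Nat.testBit_zero]
  by_cases h : x.toNat % 2 = 1 <;> simp [h] <;> omega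

theorem pvBound_double (a r : Int) (w : Nat) (hr : r = 0 ∨ r = 1) :
    pvBound (2*a + r) (w+1) = pvBound a w := by
  unfold pvBound
  rw [decide_eq_decide]
  have h2 : (2:Int)^(w+1) = 2 * 2^w := by ring
  constructor <;> intro h <;> omega

theorem pvCode_bound (x y : Int) : 0 ≤ pvCode x y ∧ pvCode x y < 4 := by
  unfold pvCode
  rcases pvTb_cases x 0 with h | h <;> rcases pvTb_cases y 0 with h' | h' <;>
    rw [h, h'] <;> omega

theorem pvCode_tb (a b : Int) :
    pvTb (pvCode a b) 1 = pvTb a 0 ∧ pvTb (pvCode a b) 0 = pvTb b 0 := by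
  unfold pvCode
  rcases pvTb_cases a 0 with h | h <;> rcases pvTb_cases b 0 with h' | h' <;>
    rw [h, h'] <;> norm_num <;> constructor <;> rfl

theorem pvCode_self (s : Int) (h0 : 0 ≤ s) (h4 : s < 4) :
    2 * pvTb s 1 + pvTb s 0 = s := by
  interval_cases s <;> decide

theorem pv_all_congr {α : Type} (l : List α) (f g : α → Bool)
    (h : ∀ x ∈ l, f x = g x) : l.all f = l.all g := by
  induction l with
  | nil => rfl
  | cons x xs ih =>
    simp only [List.all_cons, h x (by simp), ih (fun v hv => h v (by simp [hv]))]

-- appending one processed row to an A-side column pair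
theorem pvAval_snoc (c : List Bool) (cell : Bool) (a b s' : Int)
    (hs0 : 0 ≤ s') (hs4 : s' < 4) :
    (pvAval (c ++ [cell]) (2*a + pvTb s' 1) (2*b + pvTb s' 0)
      && (pvCode (2*a + pvTb s' 1) (2*b + pvTb s' 0) == s'))
    = (pvAval c a b && pvOkb (!cell) (pvCode a b) s') := by
  have hX : pvTb s' 1 = 0 ∨ pvTb s' 1 = 1 := pvTb_cases s' 1
  have hY : pvTb s' 0 = 0 ∨ pvTb s' 0 = 1 := pvTb_cases s' 0
  by_cases ha : 0 ≤ a
  · by_cases hb : 0 ≤ b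
    · -- main case
      have hbx : pvBound (2*a + pvTb s' 1) (c.length + 1 + 1) = pvBound a (c.length + 1) :=
        pvBound_double a _ (c.length + 1) hX
      have hby : pvBound (2*b + pvTb s' 0) (c.length + 1 + 1) = pvBound b (c.length + 1) :=
        pvBound_double b _ (c.length + 1) hY
      have htbx0 : pvTb (2*a + pvTb s' 1) 0 = pvTb s' 1 := pvTb_zero a _ hX ha
      have htby0 : pvTb (2*b + pvTb s' 0) 0 = pvTb s' 0 := pvTb_zero b _ hY hb
      have hcode : pvCode (2*a + pvTb s' 1) (2*b + pvTb s' 0) = s' := by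
        unfold pvCode
        rw [htbx0, htby0]
        exact pvCode_self s' hs0 hs4
      have htbx1 : ∀ k : Nat, pvTb (2*a + pvTb s' 1) (k+1) = pvTb a k := pvTb_succ a _ hX
      have htby1 : ∀ k : Nat, pvTb (2*b + pvTb s' 0) (k+1) = pvTb b k := pvTb_succ b _ hY
      have hok : pvOkb (!cell) (pvCode a b) s'
          = pvWin (2*a + pvTb s' 1) (2*b + pvTb s' 0) 1 0 cell := by
        unfold pvOkb pvWin
        have hb1 : pvBound (pvCode a b) 2 = true := by
          unfold pvBound
          have := pvCode_bound a b
          simp only [decide_eq_true_eq]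
          constructor <;> [exact this.1; simpa using this.2]
        have hb2 : pvBound s' 2 = true := by
          unfold pvBound
          simp only [decide_eq_true_eq]
          constructor <;> [exact hs0; simpa using hs4]
        rw [hb1, hb2, (pvCode_tb a b).1, (pvCode_tb a b).2, htbx1 0, htby1 0, htbx0, htby0]
        have hd : (decide (pvTb a 0 + pvTb b 0 + pvTb s' 1 + pvTb s' 0 = 1))
            = (decide (pvTb a 0 + pvTb s' 1 + pvTb b 0 + pvTb s' 0 = 1)) := by
          rw [decide_eq_decide]
          constructor <;> intro <;> omega
        rw [hd]
        cases cell <;> simp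
      have hwin : ∀ r ∈ List.range c.length,
          pvWin (2*a + pvTb s' 1) (2*b + pvTb s' 0)
            (c.length + 1 - r) (c.length + 1 - 1 - r) ((c ++ [cell]).getD r false)
          = pvWin a b (c.length - r) (c.length - 1 - r) (c.getD r false) := by
        intro r hr
        rw [List.mem_range] at hr
        have e1 : c.length + 1 - r = (c.length - r) + 1 := by omega
        have e2 : c.length + 1 - 1 - r = (c.length - 1 - r) + 1 := by omega
        unfold pvWin
        rw [e1, e2, htbx1, htbx1, htby1, htby1, List.getD_append c [cell] false r hr]
      -- unfold both sides and compare component-wise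
      unfold pvAval
      simp only [List.length_append, List.length_singleton, List.range_succ, List.all_append,
        List.all_cons, List.all_nil, Bool.and_true]
      have hlast : (c ++ [cell]).getD c.length false = cell := by
        simp [List.getD_eq_getElem?_getD]
      have e3 : c.length + 1 - c.length = 1 := by omega
      have e4 : c.length + 1 - 1 - c.length = 0 := by omega
      rw [pv_all_congr _ _ _ hwin, hcode, hlast, e3, e4]
      have : (s' == s') = true := by simp
      rw [this, ← hok]
      rw [show c.length + 1 + 1 = c.length + 1 + 1 from rfl]
      rw [hbx, hby]
      cases pvBound a (c.length + 1) <;> cases pvBound b (c.length + 1) <;>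
        cases (List.range c.length).all (fun r => pvWin a b (c.length - r) (c.length - 1 - r) (c.getD r false)) <;>
        cases pvOkb (!cell) (pvCode a b) s' <;> simp
    · -- b < 0 : both sides false via the y bound
      have hbf : pvBound (2*b + pvTb s' 0) ((c ++ [cell]).length + 1) = false := by
        unfold pvBound
        simpa using (by rcases hY with h | h <;> omega :
          ¬ (0 ≤ 2*b + pvTb s' 0 ∧ 2*b + pvTb s' 0 < 2 ^ ((c ++ [cell]).length + 1)))
      have hbf2 : pvBound b (c.length + 1) = false := by
        unfold pvBound
        simpa using (by omega : ¬ (0 ≤ b ∧ b < 2 ^ (c.length + 1)))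
      have h1 : pvAval (c ++ [cell]) (2*a + pvTb s' 1) (2*b + pvTb s' 0) = false := by
        unfold pvAval; rw [hbf]; simp
      have h2 : pvAval c a b = false := by
        unfold pvAval; rw [hbf2]; simp
      simp [h1, h2]
  · have hbf : pvBound (2*a + pvTb s' 1) ((c ++ [cell]).length + 1) = false := by
      unfold pvBound
      simpa using (by rcases hX with h | h <;> omega :
        ¬ (0 ≤ 2*a + pvTb s' 1 ∧ 2*a + pvTb s' 1 < 2 ^ ((c ++ [cell]).length + 1)))
    have hbf2 : pvBound a (c.length + 1) = false := by
      unfold pvBound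
      simpa using (by omega : ¬ (0 ≤ a ∧ a < 2 ^ (c.length + 1)))
    have h1 : pvAval (c ++ [cell]) (2*a + pvTb s' 1) (2*b + pvTb s' 0) = false := by
      unfold pvAval; rw [hbf]; simp
    have h2 : pvAval c a b = false := by
      unfold pvAval; rw [hbf2]; simp
    simp [h1, h2]

-- ---- the A-side row dictionaries and their invariant ----

def pvRow0 (c0 : Bool) : PySem.Dict Int (List (Int × Int)) :=
  pvGroupL ((get_blocks (!c0)).map (fun b => (b.2.1, (b.2.2.1, b.2.2.2)))) PySem.Dict.empty

def pvStepRow (cell : Bool) (D : PySem.Dict Int (List (Int × Int))) :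
    PySem.Dict Int (List (Int × Int)) :=
  pvGroupL (D.items.flatMap (fun kv =>
    kv.2.flatMap (fun v =>
      (((pvBlocksD (!cell)).get? kv.1).getD []).map (fun s' => (s', updated_values v s')))))
    PySem.Dict.empty

-- after processing cells c, the dict maps each state code s to the pairs valid for c ending in s
def pvInvA (c : List Bool) (D : PySem.Dict Int (List (Int × Int))) : Prop :=
  D.keys.Nodup ∧
  ∀ s x y, ((D.getD s []).count (x, y))
      = if pvAval c x y && (pvCode x y == s) then 1 else 0

theorem pvAval_out_x (c : List Bool) (x y : Int)
    (h : ¬ (0 ≤ x ∧ x < 2 ^ (c.length + 1))) : pvAval c x y = false := by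
  unfold pvAval pvBound
  have hf : decide (0 ≤ x ∧ x < 2 ^ (c.length + 1)) = false := by simpa using h
  rw [hf]
  simp

theorem pvAval_out_y (c : List Bool) (x y : Int)
    (h : ¬ (0 ≤ y ∧ y < 2 ^ (c.length + 1))) : pvAval c x y = false := by
  unfold pvAval pvBound
  have hf : decide (0 ≤ y ∧ y < 2 ^ (c.length + 1)) = false := by simpa using h
  rw [hf]
  simp

theorem pvCode_out (x y s : Int) (h : ¬ (0 ≤ s ∧ s < 4)) : (pvCode x y == s) = false := by
  have := pvCode_bound x y
  simp only [beq_eq_false_iff_ne, ne_eq]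
  intro he
  rw [he] at this
  exact h ⟨this.1, this.2⟩

theorem pvRow0_invA (c0 : Bool) : pvInvA [c0] (pvRow0 c0) := by
  constructor
  · exact pvGroupL_nodup _ _ (by simp [PySem.Dict.keys_empty])
  intro s x y
  rw [pvRow0, pvGroupL_getD, PySem.Dict.getD_empty, List.nil_append, pv_count_filter_map]
  by_cases hx : 0 ≤ x ∧ x < 4
  · by_cases hy : 0 ≤ y ∧ y < 4
    · by_cases hs : 0 ≤ s ∧ s < 4
      · obtain ⟨hx1, hx2⟩ := hx
        obtain ⟨hy1, hy2⟩ := hy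
        obtain ⟨hs1, hs2⟩ := hs
        cases c0 <;> (interval_cases x <;> interval_cases y <;> interval_cases s <;> decide)
      · rw [pvCode_out x y s hs]
        rw [Bool.and_false, if_neg (by simp), List.count_eq_zero]
        cases c0 <;>
          (intro hmem; simp [get_blocks, HAS_GAS_BLOCK, EMPTY_BLOCK, Prod.ext_iff] at hmem) <;>
          omega
    · rw [pvAval_out_y [c0] x y (by simpa using hy)]
      rw [Bool.false_and, if_neg (by simp), List.count_eq_zero]
      cases c0 <;>
        (intro hmem; simp [get_blocks, HAS_GAS_BLOCK, EMPTY_BLOCK, Prod.ext_iff] at hmem) <;>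
        omega
  · rw [pvAval_out_x [c0] x y (by simpa using hx)]
    rw [Bool.false_and, if_neg (by simp), List.count_eq_zero]
    cases c0 <;>
      (intro hmem; simp [get_blocks, HAS_GAS_BLOCK, EMPTY_BLOCK, Prod.ext_iff] at hmem) <;>
      omega

theorem pv_mem_keys_of_getD_ne {α : Type} (d : PySem.Dict Int (List α)) (k : Int)
    (h : d.getD k [] ≠ []) : k ∈ d.keys := by
  by_contra hmem
  have hc : d.contains k = false := by
    rw [PySem.Dict.contains_eq_decide_mem_keys]
    simpa using hmem
  exact h (PySem.Dict.getD_of_not_contains d [] hc)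

theorem pv_sum_map_ite_const {α : Type} (l : List α) (q : α → Bool) (K : Nat) :
    (l.map (fun v => if q v then K else 0)).sum = K * l.countP q := by
  induction l with
  | nil => simp
  | cons v vs ih =>
    by_cases hv : q v <;> simp [List.countP_cons, hv, ih] <;> ring

theorem pvAval_nonneg (c : List Bool) (x y : Int) (h : pvAval c x y = true) :
    0 ≤ x ∧ x < 2 ^ (c.length + 1) ∧ 0 ≤ y ∧ y < 2 ^ (c.length + 1) := by
  unfold pvAval pvBound at h
  simp only [Bool.and_eq_true, decide_eq_true_eq] at h
  exact ⟨h.1.1.1, h.1.1.2, h.1.2.1, h.1.2.2⟩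

theorem pv_upd_eq (v : Int × Int) (s' : Int) (h0 : 0 ≤ s') (h4 : s' < 4) :
    updated_values v s' = (v.1 * 2 + pvTb s' 1, v.2 * 2 + pvTb s' 0) := by
  obtain ⟨a, b⟩ := v
  interval_cases s' <;> rfl

theorem pvStepRow_invA (c : List Bool) (cell : Bool) (D : PySem.Dict Int (List (Int × Int)))
    (hD : pvInvA c D) : pvInvA (c ++ [cell]) (pvStepRow cell D) := by
  obtain ⟨hnd, hcount⟩ := hD
  constructor
  · exact pvGroupL_nodup _ _ (by simp [PySem.Dict.keys_empty])
  intro s' x' y'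
  rw [pvStepRow, pvGroupL_getD, PySem.Dict.getD_empty, List.nil_append, pv_count_filter_map,
    pv_count_flatMap, PySem.Dict.items_eq_map_keys D hnd [], List.map_map]
  simp only [Function.comp_def]
  have hBk : ∀ k : Int, ((pvBlocksD (!cell)).get? k).getD [] = (pvBlocksD (!cell)).getD k [] :=
    fun k => (PySem.Dict.getD_eq_get?_getD _ _ _).symm
  -- evaluate the contribution of one key k
  have hFk : ∀ k : Int,
      (((D.getD k []).flatMap (fun v =>
          (((pvBlocksD (!cell)).get? k).getD []).map (fun s'' => (s'', updated_values v s'')))).count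
        (s', (x', y')))
      = if pvOkb (!cell) k s' then (D.getD k []).countP (fun v => updated_values v s' == (x', y')) else 0 := by
    intro k
    rw [pv_count_flatMap]
    have hEv : ∀ v : Int × Int,
        ((((pvBlocksD (!cell)).get? k).getD []).map (fun s'' => (s'', updated_values v s''))).count
          (s', (x', y'))
        = if updated_values v s' == (x', y') then (if pvOkb (!cell) k s' then 1 else 0) else 0 := by
      intro v
      rw [pv_count_map, hBk]
      by_cases hC : (updated_values v s' == (x', y')) = true
      · rw [if_pos hC, ← pvBlocksD_count (!cell) k s']
        apply pv_countP_eq_count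
        intro w
        by_cases hw : w = s'
        · subst hw
          have hC' : updated_values v w = (x', y') := by simpa using hC
          simp [hC']
        · have h1 : ((w, updated_values v w) == (s', (x', y'))) = false := by
            simp [Prod.ext_iff, hw]
          have h2 : (w == s') = false := by simpa using hw
          rw [h1, h2]
      · have hC' : (updated_values v s' == (x', y')) = false := by simpa using hC
        rw [hC', if_neg (by simp)]
        rw [List.countP_eq_zero]
        intro w hw
        intro hq
        have hq' : (w, updated_values v w) = (s', (x', y')) := by simpa using hq
        have hw1 : w = s' := congrArg Prod.fst hq'
        have hu : updated_values v w = (x', y') := congrArg Prod.snd hq'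
        rw [hw1] at hu
        exact absurd (by simpa using hu : (updated_values v s' == (x', y')) = true) hC
    calc ((D.getD k []).map (fun v =>
            ((((pvBlocksD (!cell)).get? k).getD []).map (fun s'' => (s'', updated_values v s''))).count
              (s', (x', y')))).sum
        = ((D.getD k []).map (fun v =>
            if updated_values v s' == (x', y') then (if pvOkb (!cell) k s' then 1 else 0) else 0)).sum := by
          congr 1
          exact List.map_congr_left (fun v _ => hEv v)
      _ = (if pvOkb (!cell) k s' then 1 else 0) * (D.getD k []).countP (fun v => updated_values v s' == (x', y')) := by
          rw [pv_sum_map_ite_const]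
      _ = _ := by
          by_cases hok : pvOkb (!cell) k s' <;> simp [hok]
  by_cases hs : 0 ≤ s' ∧ s' < 4
  · obtain ⟨hs0, hs4⟩ := hs
    by_cases hsolv : x' = 2*((x' - pvTb s' 1)/2) + pvTb s' 1 ∧ y' = 2*((y' - pvTb s' 0)/2) + pvTb s' 0
    · -- a unique preimage pair exists
      set a0 : Int := (x' - pvTb s' 1)/2 with ha0
      set b0 : Int := (y' - pvTb s' 0)/2 with hb0
      have hq : ∀ v : Int × Int, (updated_values v s' == (x', y')) = (v == (a0, b0)) := by
        intro v
        rw [pv_upd_eq v s' hs0 hs4, Bool.eq_iff_iff]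
        simp only [beq_iff_eq, Prod.ext_iff]
        constructor <;> intro h <;> [exact ⟨by omega, by omega⟩; exact ⟨by omega, by omega⟩]
      have hF2 : ∀ k : Int,
          (if pvOkb (!cell) k s' then (D.getD k []).countP (fun v => updated_values v s' == (x', y')) else 0)
          = if pvOkb (!cell) k s' && (pvAval c a0 b0 && (pvCode a0 b0 == k)) then 1 else 0 := by
        intro k
        by_cases hok : pvOkb (!cell) k s'
        · rw [if_pos hok]
          rw [pv_countP_eq_count _ _ _ hq, hcount k a0 b0]
          simp [hok]
        · simp [hok]
      have hmap : (D.keys.map (fun k =>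
            (((D.getD k []).flatMap (fun v =>
              (((pvBlocksD (!cell)).get? k).getD []).map (fun s'' => (s'', updated_values v s'')))).count
              (s', (x', y'))))).sum
          = (D.keys.map (fun k =>
              if pvOkb (!cell) k s' && (pvAval c a0 b0 && (pvCode a0 b0 == k)) then 1 else 0)).sum := by
        congr 1
        refine List.map_congr_left (fun k _ => ?_)
        rw [hFk k, hF2 k]
      rw [hmap]
      rw [pv_sum_map_indicator _ _ (pvCode a0 b0)
        (fun k hk => by simp [(by simpa using hk.symm : (pvCode a0 b0 == k) = false)]) hnd]
      have hsnoc := pvAval_snoc c cell a0 b0 s' hs0 hs4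
      rw [← hsolv.1, ← hsolv.2] at hsnoc
      rw [hsnoc]
      by_cases hval : (pvAval c a0 b0 && pvOkb (!cell) (pvCode a0 b0) s') = true
      · have hmem : pvCode a0 b0 ∈ D.keys := by
          apply pv_mem_keys_of_getD_ne
          intro hnil
          have := hcount (pvCode a0 b0) a0 b0
          rw [hnil] at this
          simp only [List.count_nil] at this
          rw [(Bool.and_eq_true _ _).mp hval |>.1] at this
          simp at this
        rw [if_pos hmem, hval]
        simp only [Bool.and_eq_true] at hval
        simp [hval.1, hval.2]
      · have hval' : (pvAval c a0 b0 && pvOkb (!cell) (pvCode a0 b0) s') = false := by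
          simpa using hval
        rw [hval']
        have hz : (if (pvOkb (!cell) (pvCode a0 b0) s' && (pvAval c a0 b0 && (pvCode a0 b0 == pvCode a0 b0))) = true then (1:Nat) else 0) = 0 := by
          cases hav : pvAval c a0 b0 with
          | false => simp [hav]
          | true =>
            have hokf : pvOkb (!cell) (pvCode a0 b0) s' = false := by
              cases hok : pvOkb (!cell) (pvCode a0 b0) s' with
              | false => rfl
              | true => rw [hav, hok] at hval'; exact absurd hval' (by simp)
            simp [hokf]
        conv_rhs => rw [if_neg (show ¬ (false = true) by simp)]
        split
        · exact hz
        · rfl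
    · -- no integer pair maps onto (x', y') under this transition
      have hzero : ∀ k ∈ D.keys,
          (((D.getD k []).flatMap (fun v =>
            (((pvBlocksD (!cell)).get? k).getD []).map (fun s'' => (s'', updated_values v s'')))).count
            (s', (x', y'))) = 0 := by
        intro k _
        rw [hFk k]
        have hcp : (D.getD k []).countP (fun v => updated_values v s' == (x', y')) = 0 := by
          rw [List.countP_eq_zero]
          intro v _
          rw [pv_upd_eq v s' hs0 hs4]
          simp only [beq_iff_eq, Prod.ext_iff, not_and]
          intro h1 h2
          exact absurd (by constructor <;> omega) hsolv
        rw [hcp]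
        simp
      have hsum0 : (D.keys.map (fun k =>
          (((D.getD k []).flatMap (fun v =>
            (((pvBlocksD (!cell)).get? k).getD []).map (fun s'' => (s'', updated_values v s'')))).count
            (s', (x', y'))))).sum = 0 := by
        apply List.sum_eq_zero
        intro n hn
        obtain ⟨k, hk, rfl⟩ := List.mem_map.mp hn
        exact hzero k hk
      rw [hsum0]
      have hrhs : (pvAval (c ++ [cell]) x' y' && (pvCode x' y' == s')) = false := by
        by_contra hh
        have htrue : (pvAval (c ++ [cell]) x' y' && (pvCode x' y' == s')) = true := by
          simpa using hh
        obtain ⟨hav, hcd⟩ := Bool.and_eq_true _ _ |>.mp htrue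
        obtain ⟨hx0, _, hy0, _⟩ := pvAval_nonneg _ _ _ hav
        have hex : pvTb x' 0 = x' % 2 := pvTb_emod x' hx0
        have hey : pvTb y' 0 = y' % 2 := pvTb_emod y' hy0
        have hcd' : pvCode x' y' = s' := by simpa using hcd
        have hss : 2 * pvTb s' 1 + pvTb s' 0 = s' := pvCode_self s' hs0 hs4
        unfold pvCode at hcd'
        have hX := pvTb_cases s' 1
        have hY := pvTb_cases s' 0
        have h1 : pvTb x' 0 = pvTb s' 1 ∧ pvTb y' 0 = pvTb s' 0 := by
          rcases pvTb_cases x' 0 with h | h <;> rcases pvTb_cases y' 0 with h' | h' <;>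
            rcases hX with hx | hx <;> rcases hY with hy | hy <;> omega
        apply hsolv
        constructor <;> omega
      rw [hrhs]
      simp
  · -- s' is not a valid state code: both sides vanish
    have hokf : ∀ k : Int, pvOkb (!cell) k s' = false := by
      intro k
      unfold pvOkb
      have hb : pvBound s' 2 = false := by
        unfold pvBound
        simpa using (by omega : ¬ (0 ≤ s' ∧ s' < 2 ^ 2))
      rw [hb]
      simp
    have hsum0 : (D.keys.map (fun k =>
        (((D.getD k []).flatMap (fun v =>
          (((pvBlocksD (!cell)).get? k).getD []).map (fun s'' => (s'', updated_values v s'')))).count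
          (s', (x', y'))))).sum = 0 := by
      apply List.sum_eq_zero
      intro n hn
      obtain ⟨k, hk, rfl⟩ := List.mem_map.mp hn
      rw [hFk k, hokf k]
      simp
    rw [hsum0, pvCode_out x' y' s' hs]
    simp

theorem pvGroupL_flatMap {α β : Type} (l : List β) (f : β → List (Int × α))
    (d : PySem.Dict Int (List α)) :
    pvGroupL (l.flatMap f) d = l.foldl (fun d v => pvGroupL (f v) d) d := by
  unfold pvGroupL
  rw [List.foldl_flatMap]

-- the dict built for one later row in generate_cols is pvBlocksD
theorem pv_blocks_eq (e : Bool) :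
    ((get_blocks e).foldl (fun blocks block =>
        if blocks.contains block.1 then
          blocks.insert block.1 (blocks.getD block.1 [] ++ [block.2.1])
        else
          blocks.insert block.1 [block.2.1]) PySem.Dict.empty) = pvBlocksD e := by
  unfold pvBlocksD pvGroupL
  rw [List.foldl_map]

-- the grouping loop over the first row is pvRow0's grouping
theorem pv_row0_eq (e : Bool) (d : PySem.Dict Int (List (Int × Int))) :
    ((get_blocks e).foldl (fun cols block =>
        let temp_list := (block.2.2.1, block.2.2.2)
        if cols.contains block.2.1 then
          cols.insert block.2.1 (cols.getD block.2.1 [] ++ [temp_list])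
        else
          cols.insert block.2.1 [temp_list]) d)
      = pvGroupL ((get_blocks e).map (fun b => (b.2.1, (b.2.2.1, b.2.2.2)))) d := by
  unfold pvGroupL
  rw [List.foldl_map]

-- the items loop over the previous dict is pvStepRow
theorem pv_tempcols_eq (cell : Bool) (D : PySem.Dict Int (List (Int × Int))) :
    (D.items.foldl (fun temp_cols kv =>
        match (pvBlocksD (!cell)).get? kv.1 with
        | none => temp_cols
        | some bvs =>
          kv.2.foldl (fun temp_cols value =>
            bvs.foldl (fun temp_cols block_value =>
              let temp_list := updated_values value block_value
              if temp_cols.contains block_value then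
                temp_cols.insert block_value (temp_cols.getD block_value [] ++ [temp_list])
              else
                temp_cols.insert block_value [temp_list]) temp_cols) temp_cols) PySem.Dict.empty)
      = pvStepRow cell D := by
  unfold pvStepRow
  rw [pvGroupL_flatMap]
  refine PySem.List.foldl_congr_mem _ _ _ _ ?_
  intro acc kv _
  cases hb : (pvBlocksD (!cell)).get? kv.1 with
  | none =>
    simp only [hb, Option.getD_none]
    have : kv.2.flatMap (fun v => ([] : List Int).map (fun s' => (s', updated_values v s'))) = [] := by
      simp
    rw [this]
    rfl
  | some bvs =>
    simp only [hb, Option.getD_some]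
    rw [pvGroupL_flatMap]
    refine (PySem.List.foldl_congr_mem _ _ _ _ ?_).symm
    intro acc2 v _
    unfold pvGroupL
    rw [List.foldl_map]

-- the outer row loop of generate_cols, written with the helper dictionaries
def pvOuterF (g : List (List Bool)) (j : Int) :
    PySem.Dict Int (List (Int × Int)) → Int → PySem.Dict Int (List (Int × Int)) :=
  fun cols i =>
    if i == 0 then
      pvGroupL ((get_blocks (! pvCell g i j)).map (fun b => (b.2.1, (b.2.2.1, b.2.2.2)))) cols
    else
      pvStepRow (pvCell g i j) cols

theorem pv_body_eq (g : List (List Bool)) (j : Int) (cols : PySem.Dict Int (List (Int × Int)))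
    (i : Int) :
    (if i == 0 then
        (get_blocks (! pvCell g i j)).foldl (fun cols block =>
          let temp_list := (block.2.2.1, block.2.2.2)
          if cols.contains block.2.1 then
            cols.insert block.2.1 (cols.getD block.2.1 [] ++ [temp_list])
          else
            cols.insert block.2.1 [temp_list]) cols
      else
        let blocks : PySem.Dict Int (List Int) :=
          (get_blocks (! pvCell g i j)).foldl (fun blocks block =>
            if blocks.contains block.1 then
              blocks.insert block.1 (blocks.getD block.1 [] ++ [block.2.1])
            else
              blocks.insert block.1 [block.2.1]) PySem.Dict.empty
        let temp_cols : PySem.Dict Int (List (Int × Int)) :=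
          cols.items.foldl (fun temp_cols kv =>
            match blocks.get? kv.1 with
            | none => temp_cols
            | some bvs =>
              kv.2.foldl (fun temp_cols value =>
                bvs.foldl (fun temp_cols block_value =>
                  let temp_list := updated_values value block_value
                  if temp_cols.contains block_value then
                    temp_cols.insert block_value (temp_cols.getD block_value [] ++ [temp_list])
                  else
                    temp_cols.insert block_value [temp_list]) temp_cols) temp_cols) PySem.Dict.empty
        temp_cols)
      = pvOuterF g j cols i := by
  unfold pvOuterF
  by_cases hi : (i == 0) = true
  · rw [if_pos hi, if_pos hi]
    exact pv_row0_eq _ _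
  · rw [if_neg hi, if_neg hi]
    simp only [pv_blocks_eq]
    exact pv_tempcols_eq _ _

theorem pv_generate_cols_eq (r0 : List Bool) (rest : List (List Bool)) (j : Int) :
    generate_cols (r0 :: rest) j
      = ((rest.foldl (fun D row => pvStepRow (PySem.List.pyGetD row j false) D)
          (pvRow0 (PySem.List.pyGetD r0 j false))).items).flatMap (fun kv => kv.2) := by
  unfold generate_cols
  rw [PySem.List.foldl_congr_mem _ _ (pvOuterF (r0 :: rest) j) _
    (fun acc i _ => pv_body_eq (r0 :: rest) j acc i)]
  have hpos : (0 : Int) < ((r0 :: rest).length : Int) := by simp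
  rw [PySem.List.pyRange_one_cons hpos, List.foldl_cons]
  simp only [zero_add]
  have hcell0 : pvCell (r0 :: rest) 0 j = PySem.List.pyGetD r0 j false := by
    unfold pvCell
    simp [pysem]
  have h0 : pvOuterF (r0 :: rest) j PySem.Dict.empty 0 = pvRow0 (PySem.List.pyGetD r0 j false) := by
    unfold pvOuterF pvRow0
    rw [if_pos (by decide), hcell0]
  rw [h0]
  have htail : ∀ (acc : PySem.Dict Int (List (Int × Int))), ∀ i ∈ PySem.List.pyRange 1 ((r0 :: rest).length : Int) 1,
      pvOuterF (r0 :: rest) j acc i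
        = pvStepRow (PySem.List.pyGetD (PySem.List.pyGetD (r0 :: rest) i []) j false) acc := by
    intro acc i hi
    have hne : (i == 0) = false := by
      have := (PySem.List.mem_pyRange_one).mp hi
      simpa using (by omega : ¬ i = 0)
    unfold pvOuterF
    rw [if_neg (by simp [hne])]
    rfl
  rw [PySem.List.foldl_congr_mem _ _ _ _ htail]
  rw [show ((fun (acc : PySem.Dict Int (List (Int × Int))) (i : Int) =>
      pvStepRow (PySem.List.pyGetD (PySem.List.pyGetD (r0 :: rest) i []) j false) acc))
    = (fun acc i => (fun (D : PySem.Dict Int (List (Int × Int))) (row : List Bool) =>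
        pvStepRow (PySem.List.pyGetD row j false) D) acc (PySem.List.pyGetD (r0 :: rest) i [])) from rfl]
  rw [PySem.List.foldl_pyRange_pyGetD' (r0 :: rest) ([] : List Bool)
    (fun D row => pvStepRow (PySem.List.pyGetD row j false) D) _ (by omega : (0:Int) ≤ 1)]
  rw [PySem.List.foldl_append_eq_flatMap]
  simp

theorem pv_fold_rows (j : Int) (rows : List (List Bool)) :
    ∀ (c : List Bool) (D : PySem.Dict Int (List (Int × Int))), pvInvA c D →
    pvInvA (c ++ rows.map (fun row => PySem.List.pyGetD row j false))
      (rows.foldl (fun D row => pvStepRow (PySem.List.pyGetD row j false) D) D) := by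
  induction rows with
  | nil => intro c D h; simpa using h
  | cons r rs ih =>
    intro c D h
    simp only [List.foldl_cons, List.map_cons]
    have h2 := ih (c ++ [PySem.List.pyGetD r j false]) _
      (pvStepRow_invA c (PySem.List.pyGetD r j false) D h)
    simpa [List.append_assoc] using h2

theorem pv_gc_invA (r0 : List Bool) (rest : List (List Bool)) (j : Int) :
    pvInvA (pvColL (r0 :: rest) j)
      (rest.foldl (fun D row => pvStepRow (PySem.List.pyGetD row j false) D)
        (pvRow0 (PySem.List.pyGetD r0 j false))) := by
  have hcol : pvColL (r0 :: rest) j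
      = [PySem.List.pyGetD r0 j false] ++ rest.map (fun row => PySem.List.pyGetD row j false) := by
    simp [pvColL]
  rw [hcol]
  exact pv_fold_rows j rest [PySem.List.pyGetD r0 j false] _ (pvRow0_invA _)

-- count characterization of an invariant dict, flattened
theorem pv_flatten_count (c : List Bool) (D : PySem.Dict Int (List (Int × Int)))
    (h : pvInvA c D) (x y : Int) :
    ((D.items.flatMap (fun kv => kv.2)).count (x, y)) = if pvAval c x y then 1 else 0 := by
  obtain ⟨hnd, hcount⟩ := h
  rw [pv_count_flatMap, PySem.Dict.items_eq_map_keys D hnd [], List.map_map]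
  simp only [Function.comp_def]
  have hmap : (D.keys.map (fun k => (D.getD k []).count (x, y))).sum
      = (D.keys.map (fun k => if pvAval c x y && (pvCode x y == k) then 1 else 0)).sum := by
    congr 1
    exact List.map_congr_left (fun k _ => hcount k x y)
  rw [hmap]
  rw [pv_sum_map_indicator _ _ (pvCode x y)
    (fun k hk => by simp [(by simpa using hk.symm : (pvCode x y == k) = false)]) hnd]
  by_cases hav : pvAval c x y = true
  · have hmem : pvCode x y ∈ D.keys := by
      apply pv_mem_keys_of_getD_ne
      intro hnil
      have := hcount (pvCode x y) x y
      rw [hnil] at this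
      simp only [List.count_nil] at this
      rw [hav] at this
      simp at this
    rw [if_pos hmem, hav]
    simp
  · have hav' : pvAval c x y = false := by simpa using hav
    rw [hav']
    simp

theorem pv_gc_count (r0 : List Bool) (rest : List (List Bool)) (j x y : Int) :
    ((generate_cols (r0 :: rest) j).count (x, y))
      = if pvAval (pvColL (r0 :: rest) j) x y then 1 else 0 := by
  rw [pv_generate_cols_eq]
  exact pv_flatten_count _ _ (pv_gc_invA r0 rest j) x y
-- ---- bit arithmetic shared with the B side ----

theorem pv_pow_cast (k : Nat) : ((2:Int)^k) = ((2^k : Nat) : Int) := by push_cast; ring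

theorem pv_band_shift (x : Int) (k : Nat) (hx : 0 ≤ x) :
    PySem.Int.band (x >>> k) 1 = pvTb x k := by
  unfold pvTb
  rw [PySem.Int.band_one, Int.shiftRight_eq_div_pow]
  rw [PySem.Int.mod_eq_emod_of_pos (by omega : (0:Int) < 2)]
  rw [Nat.testBit_eq_decide_div_mod_eq]
  have key : x / ((2^k : Nat) : Int) = ((x.toNat / 2^k : Nat) : Int) := by
    conv_lhs => rw [show x = ((x.toNat : Nat) : Int) from by omega]
    rw [← Int.natCast_div]
  rw [key]
  by_cases h : x.toNat / 2^k % 2 = 1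
  · rw [if_pos (by simpa using h)]
    omega
  · rw [if_neg (by simpa using h)]
    omega

theorem pv_bor_shift (p bit : Int) (k : Nat) (hp0 : 0 ≤ p) (hp : p < 2^k)
    (hbit : bit = 0 ∨ bit = 1) :
    PySem.Int.bor p (bit <<< k) = p + bit * 2^k := by
  rcases hbit with h | h <;> subst h
  · simp [PySem.Int.bor_zero]
  · rw [Int.shiftLeft_eq, one_mul]
    have hplt : p.toNat < 2^k := by
      have := pv_pow_cast k
      omega
    rw [pv_pow_cast k, PySem.Int.bor_of_nonneg hp0 (by positivity)]
    have h3 : ((2^k : Nat) : Int).toNat = 2^k := Int.toNat_natCast _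
    rw [h3]
    have h5 := (Nat.two_pow_add_eq_or_of_lt hplt 1).symm
    rw [Nat.mul_one] at h5
    have h4 : p.toNat ||| 2^k = p.toNat + 2^k := by
      rw [Nat.lor_comm, h5]
      omega
    rw [h4]
    have := pv_pow_cast k
    push_cast
    omega

theorem pvTb_add_high (p bit : Int) (k : Nat) (hp0 : 0 ≤ p) (hp : p < 2^k)
    (hbit : bit = 0 ∨ bit = 1) :
    (∀ j, j < k → pvTb (p + bit * 2^k) j = pvTb p j) ∧ pvTb (p + bit * 2^k) k = bit := by
  have hpow := pv_pow_cast k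
  have hplt : p.toNat < 2^k := by omega
  rcases hbit with h | h <;> subst h
  · constructor
    · intro j hj
      have : p + 0 * 2^k = p := by ring
      rw [this]
    · have : p + 0 * 2^k = p := by ring
      rw [this]
      unfold pvTb
      rw [Nat.testBit_lt_two_pow (by omega : p.toNat < 2^k)]
      rfl
  · have hone : p + 1 * 2^k = p + 2^k := by ring
    rw [hone]
    have hcast : (p + 2^k).toNat = 2^k * 1 + p.toNat := by
      rw [Nat.mul_one, hpow]
      omega
    constructor
    · intro j hj
      unfold pvTb
      have ht : (p + 2^k).toNat.testBit j = p.toNat.testBit j := by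
        rw [hcast, Nat.testBit_two_pow_mul_add _ hplt, if_pos hj]
      rw [ht]
    · unfold pvTb
      have ht : (p + 2^k).toNat.testBit k = true := by
        rw [hcast, Nat.testBit_two_pow_mul_add _ hplt, if_neg (lt_irrefl k), Nat.sub_self]
        rfl
      rw [ht]
      rfl

-- ---- bit reversal and the sum bijection ----

theorem pvRev_lt (w : Nat) : ∀ m, pvRev w m < 2^w := by
  induction w with
  | zero => intro m; simp [pvRev]
  | succ w ih =>
    intro m
    unfold pvRev
    have h1 := ih (m / 2)
    have h2 : m % 2 ≤ 1 := by omega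
    have h3 : (2:Nat)^(w+1) = 2^w * 2 := by ring
    nlinarith [h1, h2]

theorem pvRev_testBit (w : Nat) : ∀ m j, j < w → (pvRev w m).testBit j = m.testBit (w - 1 - j) := by
  induction w with
  | zero => intro m j hj; omega
  | succ w ih =>
    intro m j hj
    unfold pvRev
    by_cases hjw : j < w
    · have hlow := Nat.testBit_two_pow_mul_add (a := m % 2) (pvRev_lt w (m / 2)) j
      have hcomm : pvRev w (m / 2) + m % 2 * 2 ^ w = 2^w * (m % 2) + pvRev w (m / 2) := by ring
      rw [hcomm, Nat.testBit_two_pow_mul_add _ (pvRev_lt w (m / 2)) j, if_pos hjw]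
      rw [ih (m / 2) j hjw]
      rw [Nat.testBit_div_two]
      congr 1
      omega
    · have hj' : j = w := by omega
      rw [hj']
      have hcomm : pvRev w (m / 2) + m % 2 * 2 ^ w = 2^w * (m % 2) + pvRev w (m / 2) := by ring
      rw [hcomm, Nat.testBit_two_pow_mul_add _ (pvRev_lt w (m / 2)) w, if_neg (by omega), Nat.sub_self]
      have hsub : w + 1 - 1 - w = 0 := by omega
      rw [hsub, Nat.testBit_zero, Nat.testBit_zero]
      rw [decide_eq_decide]
      omega

theorem pvRev_invol (w : Nat) (m : Nat) (hm : m < 2^w) : pvRev w (pvRev w m) = m := by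
  apply Nat.eq_of_testBit_eq
  intro i
  by_cases hi : i < w
  · rw [pvRev_testBit w _ i hi, pvRev_testBit w m (w - 1 - i) (by omega)]
    congr 1
    omega
  · rw [Nat.testBit_lt_two_pow (lt_of_lt_of_le (pvRev_lt w (pvRev w m)) (Nat.pow_le_pow_right (by omega) (by omega)))]
    rw [Nat.testBit_lt_two_pow (lt_of_lt_of_le hm (Nat.pow_le_pow_right (by omega) (by omega)))]

theorem pvTb_natCast (n : Nat) (k : Nat) : pvTb ((n : Nat) : Int) k = if n.testBit k then 1 else 0 := by
  unfold pvTb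
  rw [Int.toNat_natCast]

theorem pvBound_natCast (n : Nat) (w : Nat) : pvBound ((n : Nat) : Int) w = decide (n < 2^w) := by
  unfold pvBound
  have := pv_pow_cast w
  rw [Bool.eq_iff_iff]
  simp only [decide_eq_true_eq]
  omega

-- A-side validity of a pair is B-side validity of the bit-reversed pair
theorem pv_aval_bval (c : List Bool) (n m : Nat)
    (hn : n < 2^(c.length+1)) (hm : m < 2^(c.length+1)) :
    pvAval c (n : Int) (m : Int)
      = pvBval c ((pvRev (c.length+1) n : Nat) : Int) ((pvRev (c.length+1) m : Nat) : Int) := by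
  unfold pvAval pvBval
  have hb1 : pvBound ((n : Nat) : Int) (c.length+1) = true := by
    rw [pvBound_natCast]; simpa using hn
  have hb2 : pvBound ((m : Nat) : Int) (c.length+1) = true := by
    rw [pvBound_natCast]; simpa using hm
  have hb3 : pvBound ((pvRev (c.length+1) n : Nat) : Int) (c.length+1) = true := by
    rw [pvBound_natCast]; simpa using pvRev_lt (c.length+1) n
  have hb4 : pvBound ((pvRev (c.length+1) m : Nat) : Int) (c.length+1) = true := by
    rw [pvBound_natCast]; simpa using pvRev_lt (c.length+1) m
  rw [hb1, hb2, hb3, hb4]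
  have hwin : ∀ r ∈ List.range c.length,
      pvWin ((n : Nat) : Int) ((m : Nat) : Int) (c.length - r) (c.length - 1 - r) (c.getD r false)
        = pvWin ((pvRev (c.length+1) n : Nat) : Int) ((pvRev (c.length+1) m : Nat) : Int) r (r+1) (c.getD r false) := by
    intro r hr
    rw [List.mem_range] at hr
    unfold pvWin
    have e1 : c.length + 1 - 1 - r = c.length - r := by omega
    have e2 : c.length + 1 - 1 - (r + 1) = c.length - 1 - r := by omega
    simp only [pvTb_natCast, pvRev_testBit (c.length+1) n r (by omega),
      pvRev_testBit (c.length+1) n (r+1) (by omega), pvRev_testBit (c.length+1) m r (by omega),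
      pvRev_testBit (c.length+1) m (r+1) (by omega), e1, e2]
  rw [pv_all_congr _ _ _ hwin]

theorem pv_sum_keys (d : PySem.Dict Int Int) (hnd : d.keys.Nodup) (N : Nat)
    (hsub : ∀ k ∈ d.keys, ∃ n : Nat, n < N ∧ k = (n : Int)) (F : Int → Int) :
    ((d.keys.map (fun k => d.getD k 0 * F k)).sum
      = ∑ n ∈ Finset.range N, d.getD (n : Int) 0 * F (n : Int)) := by
  classical
  have h1 : (d.keys.map (fun k => d.getD k 0 * F k)).sum
      = ∑ k ∈ d.keys.toFinset, d.getD k 0 * F k :=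
    (List.sum_toFinset _ hnd).symm
  rw [h1]
  have hsubset : d.keys.toFinset ⊆ (Finset.range N).image (fun n : Nat => (n : Int)) := by
    intro k hk
    rw [List.mem_toFinset] at hk
    obtain ⟨n, hn, rfl⟩ := hsub k hk
    exact Finset.mem_image.mpr ⟨n, Finset.mem_range.mpr hn, rfl⟩
  rw [Finset.sum_subset hsubset]
  · rw [Finset.sum_image (by intro a _ b _ h; simpa using h)]
  · intro k _ hk
    rw [List.mem_toFinset] at hk
    have hc : d.contains k = false := by
      rw [PySem.Dict.contains_eq_decide_mem_keys]
      simpa using hk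
    rw [PySem.Dict.getD_of_not_contains d 0 hc]
    ring

theorem pv_sum_rev (h : Nat) (F G : Nat → Int)
    (hFG : ∀ m, m < 2^(h+1) → F m = G (pvRev (h+1) m)) :
    ∑ m ∈ Finset.range (2^(h+1)), F m = ∑ m ∈ Finset.range (2^(h+1)), G m := by
  refine Finset.sum_nbij' (fun m => pvRev (h+1) m) (fun m => pvRev (h+1) m) ?_ ?_ ?_ ?_ ?_
  · intro m hm
    exact Finset.mem_range.mpr (pvRev_lt (h+1) m)
  · intro m hm
    exact Finset.mem_range.mpr (pvRev_lt (h+1) m)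
  · intro m hm
    exact pvRev_invol (h+1) m (Finset.mem_range.mp hm)
  · intro m hm
    exact pvRev_invol (h+1) m (Finset.mem_range.mp hm)
  · intro m hm
    exact hFG m (Finset.mem_range.mp hm)

-- ---- the per-column dictionary step of port A ----

theorem pvAccW_flatMap {β : Type} (l : List β) (f : β → List (Int × Int))
    (d : PySem.Dict Int Int) :
    l.foldl (fun d v => pvAccW (f v) d) d = pvAccW (l.flatMap f) d := by
  unfold pvAccW
  rw [List.foldl_flatMap]

def pvColsDict (g : List (List Bool)) (i : Int) : PySem.Dict Int (List Int) :=
  pvGroupL ((generate_cols g i).map (fun col => (col.1, col.2))) PySem.Dict.empty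

def pvStepA (g : List (List Bool)) (i : Int) (grid : PySem.Dict Int Int) : PySem.Dict Int Int :=
  pvAccW (grid.items.flatMap (fun kv =>
    (((pvColsDict g i).get? kv.1).getD []).map (fun cv => (cv, kv.2)))) PySem.Dict.empty

def pvA0 (g : List (List Bool)) : PySem.Dict Int Int :=
  pvAccW ((generate_cols g 0).map (fun col => (col.2, (1:Int)))) PySem.Dict.empty

-- sums over the weighted streams
theorem pv_sum_filter_map_flatMap {β : Type} (l : List β) (f : β → List (Int × Int))
    (q : Int × Int → Bool) :
    ((((l.flatMap f).filter q).map (fun p => p.2)).sum)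
      = (l.map (fun x => (((f x).filter q).map (fun p => p.2)).sum)).sum := by
  induction l with
  | nil => simp
  | cons x xs ih => simp [List.flatMap_cons, List.filter_append, List.map_append, ih]

theorem pv_wsum_inner (ys : List Int) (v y : Int) :
    ((((ys.map (fun cv => (cv, v))).filter (fun p => p.1 == y)).map (fun p => p.2)).sum)
      = v * (ys.count y : Int) := by
  induction ys with
  | nil => simp
  | cons c cs ih =>
    by_cases hc : c = y
    · subst hc
      simp only [List.map_cons, List.filter_cons, List.count_cons]
      rw [if_pos (by simp)]
      simp only [List.map_cons, List.sum_cons, ih]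
      simp
      ring
    · simp only [List.map_cons, List.filter_cons, List.count_cons]
      rw [if_neg (by simpa using hc)]
      rw [ih]
      have : (c == y) = false := by simpa using hc
      simp [this]

theorem pvStepA_getD (g : List (List Bool)) (i : Int) (grid : PySem.Dict Int Int)
    (hnd : grid.keys.Nodup) (y : Int) :
    (pvStepA g i grid).getD y 0
      = (grid.keys.map (fun k => grid.getD k 0 * ((generate_cols g i).count (k, y) : Int))).sum := by
  unfold pvStepA
  rw [pvAccW_getD, PySem.Dict.getD_empty, pv_sum_filter_map_flatMap,
    PySem.Dict.items_eq_map_keys grid hnd 0, List.map_map]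
  simp only [Function.comp_def, zero_add]
  congr 1
  refine List.map_congr_left (fun k _ => ?_)
  have hBk : ((pvColsDict g i).get? k).getD [] = (pvColsDict g i).getD k [] :=
    (PySem.Dict.getD_eq_get?_getD _ _ _).symm
  rw [hBk]
  have hcols : (pvColsDict g i).getD k []
      = ((generate_cols g i).filter (fun p => p.1 == k)).map (fun p => p.2) := by
    unfold pvColsDict
    rw [pvGroupL_getD, PySem.Dict.getD_empty, List.nil_append, List.filter_map, List.map_map]
    rfl
  rw [hcols, pv_wsum_inner, pv_count_filter_map]

theorem pv_sum_ones (l : List (Int × Int)) (y : Int) :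
    ((((l.map (fun p => (p.2, (1:Int)))).filter (fun p => p.1 == y)).map (fun p => p.2)).sum)
      = (l.countP (fun p => p.2 == y) : Int) := by
  induction l with
  | nil => simp
  | cons p ps ih =>
    by_cases hp : p.2 = y
    · simp only [List.map_cons, List.filter_cons, List.countP_cons]
      rw [if_pos (by simpa using hp)]
      have : (p.2 == y) = true := by simpa using hp
      simp only [List.map_cons, List.sum_cons, ih, this]
      push_cast
      ring
    · simp only [List.map_cons, List.filter_cons, List.countP_cons]
      rw [if_neg (by simpa using hp)]
      have : (p.2 == y) = false := by simpa using hp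
      simp [ih, this]

theorem pvA0_getD (g : List (List Bool)) (y : Int) :
    (pvA0 g).getD y 0 = ((generate_cols g 0).countP (fun p => p.2 == y) : Int) := by
  unfold pvA0
  rw [pvAccW_getD, PySem.Dict.getD_empty, zero_add, pv_sum_ones]

theorem pv_countP_snd (l : List (Int × Int)) (N : Nat)
    (hb : ∀ p ∈ l, ∃ n : Nat, n < N ∧ p.1 = (n : Int)) (y : Int) :
    ((l.countP (fun p => p.2 == y)) : Int)
      = ∑ n ∈ Finset.range N, ((l.count ((n : Int), y)) : Int) := by
  induction l with
  | nil => simp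
  | cons p ps ih =>
    have hb' : ∀ q ∈ ps, ∃ n : Nat, n < N ∧ q.1 = (n : Int) := fun q hq => hb q (by simp [hq])
    obtain ⟨n0, hn0, hp1⟩ := hb p (by simp)
    have hsingle : ∑ n ∈ Finset.range N, ((if ((n : Int), y) = p then 1 else 0) : Int)
        = if p.2 = y then 1 else 0 := by
      rw [Finset.sum_eq_single n0]
      · by_cases hy : p.2 = y
        · rw [if_pos hy, if_pos]
          obtain ⟨p1, p2⟩ := p
          simp at hp1 hy
          simp [hp1, hy]
        · rw [if_neg hy, if_neg]
          obtain ⟨p1, p2⟩ := p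
          simp at hy hp1 ⊢
          intro _ h2
          exact hy h2.symm
      · intro m _ hm
        rw [if_neg]
        obtain ⟨p1, p2⟩ := p
        simp at hp1
        simp only [Prod.mk.injEq, not_and]
        intro h1
        exfalso
        exact hm (by exact_mod_cast h1.trans hp1)
      · intro habs
        exact absurd (Finset.mem_range.mpr hn0) habs
    simp only [List.countP_cons, List.count_cons]
    push_cast
    rw [ih hb']
    rw [Finset.sum_add_distrib]
    have hind : ∑ n ∈ Finset.range N, ((if p = ((n : Int), y) then 1 else 0) : Int)
        = if p.2 = y then 1 else 0 := by
      rw [← hsingle]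
      refine Finset.sum_congr rfl (fun n _ => ?_)
      by_cases h : p = ((n : Int), y)
      · rw [if_pos h, if_pos h.symm]
      · rw [if_neg h, if_neg (fun hh => h hh.symm)]
    have hcast : ∑ n ∈ Finset.range N, ((if (p == ((n : Int), y)) = true then (1:Int) else 0))
        = ∑ n ∈ Finset.range N, ((if p = ((n : Int), y) then (1:Int) else 0)) := by
      refine Finset.sum_congr rfl (fun n _ => ?_)
      by_cases h : p = ((n : Int), y)
      · rw [if_pos h, if_pos (by simpa using h)]
      · rw [if_neg h, if_neg (by simpa using h)]
    rw [hcast, hind]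
    by_cases h : p.2 = y
    · rw [if_pos (by simpa using h), if_pos h]
      try ring
    · rw [if_neg (by simpa using h), if_neg h]
      try ring

theorem pvColL_length (g : List (List Bool)) (j : Int) : (pvColL g j).length = g.length := by
  simp [pvColL]

-- every key produced by the A step is a valid (g.length+1)-bit mask
theorem pv_pairs_mem_bound (r0 : List Bool) (rest : List (List Bool)) (i : Int)
    (p : Int × Int) (hp : p ∈ generate_cols (r0 :: rest) i) :
    (0 ≤ p.1 ∧ p.1 < 2^((r0 :: rest).length + 1)) ∧
    (0 ≤ p.2 ∧ p.2 < 2^((r0 :: rest).length + 1)) := by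
  have hcnt := pv_gc_count r0 rest i p.1 p.2
  have hpos : 0 < ((generate_cols (r0 :: rest) i).count (p.1, p.2)) := by
    apply List.count_pos_iff.mpr
    simpa using hp
  by_cases hv : pvAval (pvColL (r0 :: rest) i) p.1 p.2 = true
  · obtain ⟨h1, h2, h3, h4⟩ := pvAval_nonneg _ _ _ hv
    rw [pvColL_length] at h2 h4
    exact ⟨⟨h1, h2⟩, ⟨h3, h4⟩⟩
  · rw [hcnt, if_neg hv] at hpos
    omega

theorem pvStepA_nodup (g : List (List Bool)) (i : Int) (grid : PySem.Dict Int Int) :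
    (pvStepA g i grid).keys.Nodup := pvAccW_nodup _ _ (by simp [PySem.Dict.keys_empty])

theorem pvStepA_keys (r0 : List Bool) (rest : List (List Bool)) (i : Int)
    (grid : PySem.Dict Int Int) (k : Int) (hk : k ∈ (pvStepA (r0 :: rest) i grid).keys) :
    ∃ n : Nat, n < 2^((r0 :: rest).length + 1) ∧ k = (n : Int) := by
  rcases pvAccW_mem_keys _ _ _ hk with h | h
  · simp [PySem.Dict.keys_empty] at h
  · rw [List.map_flatMap] at h
    obtain ⟨kv, _, hmem⟩ := List.mem_flatMap.mp h
    rw [List.map_map] at hmem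
    obtain ⟨cv, hcv, rfl⟩ := List.mem_map.mp hmem
    have hBk : ((pvColsDict (r0 :: rest) i).get? kv.1).getD [] = (pvColsDict (r0 :: rest) i).getD kv.1 [] :=
      (PySem.Dict.getD_eq_get?_getD _ _ _).symm
    rw [hBk] at hcv
    unfold pvColsDict at hcv
    rw [pvGroupL_getD, PySem.Dict.getD_empty, List.nil_append] at hcv
    obtain ⟨q, hq, hq2⟩ := List.mem_map.mp hcv
    have hqmem : q ∈ generate_cols (r0 :: rest) i := by
      have := List.mem_filter.mp hq |>.1
      obtain ⟨q', hq', rfl⟩ := List.mem_map.mp this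
      exact hq'
    have hbd := (pv_pairs_mem_bound r0 rest i q hqmem).2
    have hpow := pv_pow_cast ((r0 :: rest).length + 1)
    refine ⟨(q.2).toNat, by omega, by simp; omega⟩

theorem pvA0_nodup (g : List (List Bool)) : (pvA0 g).keys.Nodup :=
  pvAccW_nodup _ _ (by simp [PySem.Dict.keys_empty])

theorem pvA0_keys (r0 : List Bool) (rest : List (List Bool)) (k : Int)
    (hk : k ∈ (pvA0 (r0 :: rest)).keys) :
    ∃ n : Nat, n < 2^((r0 :: rest).length + 1) ∧ k = (n : Int) := by
  rcases pvAccW_mem_keys _ _ _ hk with h | h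
  · simp [PySem.Dict.keys_empty] at h
  · rw [List.map_map] at h
    obtain ⟨p, hp, rfl⟩ := List.mem_map.mp h
    have hbd := (pv_pairs_mem_bound r0 rest 0 p hp).2
    have hpow := pv_pow_cast ((r0 :: rest).length + 1)
    refine ⟨(p.2).toNat, by omega, by simp; omega⟩

theorem pv_count_cast_A (r0 : List Bool) (rest : List (List Bool)) (i x y : Int) :
    (((generate_cols (r0 :: rest) i).count (x, y)) : Int)
      = if pvAval (pvColL (r0 :: rest) i) x y then 1 else 0 := by
  rw [pv_gc_count]
  split <;> simp

theorem pv_cell_eq (g : List (List Bool)) (j : Int) (t : Nat) (ht : t < g.length) :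
    PySem.List.pyGetD (PySem.List.pyGetD g (t : Int) []) j false = (pvColL g j).getD t false := by
  rw [PySem.List.pyGetD_natCast]
  unfold pvColL
  rw [List.getD_eq_getElem?_getD, List.getD_eq_getElem?_getD, List.getElem?_map]
  rw [List.getElem?_eq_getElem ht]
  simp

-- ---- relating port A to the helper pipeline ----

theorem pv_colsdict_eq (g : List (List Bool)) (i : Int) :
    ((generate_cols g i).foldl (fun cols col =>
        if cols.contains col.1 then
          cols.insert col.1 (cols.getD col.1 [] ++ [col.2])
        else
          cols.insert col.1 [col.2]) PySem.Dict.empty) = pvColsDict g i := by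
  unfold pvColsDict pvGroupL
  rw [List.foldl_map]

theorem pv_tempgrid_eq (g : List (List Bool)) (i : Int) (grid : PySem.Dict Int Int) :
    (grid.items.foldl (fun temp_grid kv =>
        match (pvColsDict g i).get? kv.1 with
        | none => temp_grid
        | some vs =>
          vs.foldl (fun temp_grid col_value =>
            if temp_grid.contains col_value then
              temp_grid.insert col_value (temp_grid.getD col_value 0 + kv.2)
            else
              temp_grid.insert col_value kv.2) temp_grid) PySem.Dict.empty)
      = pvStepA g i grid := by
  unfold pvStepA
  rw [← pvAccW_flatMap]
  refine PySem.List.foldl_congr_mem _ _ _ _ ?_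
  intro acc kv _
  cases hb : (pvColsDict g i).get? kv.1 with
  | none =>
    simp only [hb, Option.getD_none]
    have hnil : ([] : List Int).map (fun cv => (cv, kv.2)) = [] := by simp
    rw [hnil]
    rfl
  | some vs =>
    simp only [hb, Option.getD_some]
    unfold pvAccW
    rw [List.foldl_map]

def pvRunA (r0 : List Bool) (rest : List (List Bool)) : PySem.Dict Int Int :=
  (PySem.List.pyRange 1 (r0.length : Int) 1).foldl (fun d i => pvStepA (r0 :: rest) i d)
    (pvA0 (r0 :: rest))

theorem pv_solution_eq (r0 : List Bool) (rest : List (List Bool)) (hw : r0 ≠ []) :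
    solution (r0 :: rest)
      = (pvRunA r0 rest).items.foldl (fun s kv => s + (pvRunA r0 rest).getD kv.1 0) 0 := by
  unfold solution
  have hget : PySem.List.pyGetD (r0 :: rest) 0 [] = r0 := by simp [pysem]
  simp only [hget]
  rw [PySem.List.foldl_congr_mem _ _
    (fun (grid : PySem.Dict Int Int) (i : Int) =>
      if i == 0 then pvAccW ((generate_cols (r0 :: rest) i).map (fun col => (col.2, (1:Int)))) grid
      else pvStepA (r0 :: rest) i grid) _
    (fun acc i _ => by
      show _ = if (i == 0) then pvAccW ((generate_cols (r0 :: rest) i).map (fun col => (col.2, (1:Int)))) acc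
          else pvStepA (r0 :: rest) i acc
      by_cases hi : (i == 0) = true
      · rw [if_pos hi, if_pos hi]
        unfold pvAccW
        rw [List.foldl_map]
      · rw [if_neg hi, if_neg hi]
        simp only [pv_colsdict_eq]
        exact pv_tempgrid_eq (r0 :: rest) i acc)]
  have hpos : (0 : Int) < (r0.length : Int) := by
    have : r0.length ≠ 0 := by simpa using hw
    omega
  rw [PySem.List.pyRange_one_cons hpos, List.foldl_cons]
  simp only [zero_add]
  have h0 : (if (0 : Int) == 0 then
        pvAccW ((generate_cols (r0 :: rest) 0).map (fun col => (col.2, (1:Int)))) PySem.Dict.empty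
      else pvStepA (r0 :: rest) 0 PySem.Dict.empty) = pvA0 (r0 :: rest) := by
    rw [if_pos (by decide)]
    rfl
  rw [h0]
  rw [PySem.List.foldl_congr_mem _ _ (fun (d : PySem.Dict Int Int) (i : Int) => pvStepA (r0 :: rest) i d) _
    (fun acc i hi => by
      show (if (i == 0) then pvAccW ((generate_cols (r0 :: rest) i).map (fun col => (col.2, (1:Int)))) acc
          else pvStepA (r0 :: rest) i acc) = _
      have hne : (i == 0) = false := by
        have := (PySem.List.mem_pyRange_one).mp hi
        simpa using (by omega : ¬ i = 0)
      rw [if_neg (by simp [hne])])]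
  rfl
-- ---- B-side: packed columns, the produced-pair table, dense count vectors ----

theorem pvN_toNat (h : Nat) : ((1 : Int) <<< (h + 1)).toNat = 2 ^ (h + 1) := by
  rw [Int.shiftLeft_eq, one_mul, pv_pow_cast, Int.toNat_natCast]

theorem pvN_eq (h : Nat) : ((1 : Int) <<< (h + 1)) = ((2 ^ (h + 1) : Nat) : Int) := by
  rw [Int.shiftLeft_eq, one_mul]
  exact pv_pow_cast (h + 1)

-- the packed target column integer B builds for column j (first t rows)
def pvMaskP (g : List (List Bool)) (j : Int) (t : Nat) : Int :=
  (PySem.List.pyRange 0 (t : Int) 1).foldl (fun s i =>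
    if PySem.List.pyGetD (PySem.List.pyGetD g i []) j false then s + ((1 : Int) <<< i.toNat)
    else s) 0

def pvMaskF (g : List (List Bool)) (j : Int) : Int := pvMaskP g j g.length

-- B's produced-column computation for the pair (a, b) over the first t windows
def pvProd (a b : Int) (t : Nat) : Int :=
  (PySem.List.pyRange 0 (t : Int) 1).foldl (fun c i =>
    if (PySem.Int.band (a >>> i.toNat) 1 + PySem.Int.band (a >>> (i.toNat + 1)) 1
        + PySem.Int.band (b >>> i.toNat) 1 + PySem.Int.band (b >>> (i.toNat + 1)) 1 == 1) then
      PySem.Int.bor c ((1 : Int) <<< i.toNat)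
    else c) 0

theorem pvMaskP_spec (g : List (List Bool)) (j : Int) :
    ∀ t, t ≤ g.length →
      (0 ≤ pvMaskP g j t ∧ pvMaskP g j t < 2 ^ t) ∧
      ∀ i, i < t → pvTb (pvMaskP g j t) i = (if (pvColL g j).getD i false then 1 else 0) := by
  intro t
  induction t with
  | zero =>
    intro _
    constructor
    · unfold pvMaskP
      rw [show ((0 : Nat) : Int) = 0 from rfl, PySem.List.pyRange_one_eq_nil (by omega)]
      simp
    · intro i hi; omega
  | succ t ih =>
    intro ht
    obtain ⟨⟨hm0, hmlt⟩, hbits⟩ := ih (by omega)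
    have hcast : ((t + 1 : Nat) : Int) = ((t : Nat) : Int) + 1 := by push_cast; ring
    have hunf : pvMaskP g j (t + 1)
        = (if PySem.List.pyGetD (PySem.List.pyGetD g ((t : Nat) : Int) []) j false
            then pvMaskP g j t + ((1 : Int) <<< ((t : Nat) : Int).toNat) else pvMaskP g j t) := by
      unfold pvMaskP
      rw [hcast, PySem.List.pyRange_one_succ_right (by omega : (0:Int) ≤ ((t : Nat) : Int)),
        List.foldl_append, List.foldl_cons, List.foldl_nil]
    have hcell : PySem.List.pyGetD (PySem.List.pyGetD g ((t : Nat) : Int) []) j false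
        = (pvColL g j).getD t false := pv_cell_eq g j t (by omega)
    have hshift : ((1 : Int) <<< ((t : Nat) : Int).toNat) = 2 ^ t := by
      rw [Int.toNat_natCast, Int.shiftLeft_eq, one_mul]
    set bit : Int := if (pvColL g j).getD t false then 1 else 0 with hbit
    have hbit01 : bit = 0 ∨ bit = 1 := by
      rw [hbit]; split <;> simp
    have hval : pvMaskP g j (t + 1) = pvMaskP g j t + bit * 2 ^ t := by
      rw [hunf, hcell, hshift, hbit]
      split <;> ring
    have hth := pvTb_add_high (pvMaskP g j t) bit t hm0 hmlt hbit01
    rw [hval]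
    refine ⟨⟨by rcases hbit01 with h | h <;> rw [h] <;> nlinarith,
      by
        have h2 : (2:Int) ^ (t+1) = 2 * 2 ^ t := by ring
        rcases hbit01 with h | h <;> rw [h] <;> nlinarith⟩, ?_⟩
    intro i hi
    by_cases hit : i < t
    · rw [hth.1 i hit, hbits i hit]
    · have : i = t := by omega
      rw [this, hth.2]

theorem pv_band_shift_int (x : Int) (k : Nat) (hx : 0 ≤ x) :
    PySem.Int.band (x >>> ((k : Nat) : Int)) 1 = pvTb x k := by
  rw [Int.shiftRight_natCast_right]
  exact pv_band_shift x k hx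

theorem pv_bor_shift_int (p bit : Int) (k : Nat) (hp0 : 0 ≤ p) (hp : p < 2^k)
    (hbit : bit = 0 ∨ bit = 1) :
    PySem.Int.bor p (bit <<< ((k : Nat) : Int)) = p + bit * 2^k := by
  rw [Int.shiftLeft_natCast_right]
  exact pv_bor_shift p bit k hp0 hp hbit

theorem pvProd_spec (a b : Int) (ha : 0 ≤ a) (hb : 0 ≤ b) :
    ∀ t, (0 ≤ pvProd a b t ∧ pvProd a b t < 2 ^ t) ∧
      ∀ i, i < t → pvTb (pvProd a b t) i
        = (if decide (pvTb a i + pvTb a (i+1) + pvTb b i + pvTb b (i+1) = 1) then 1 else 0) := by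
  intro t
  induction t with
  | zero =>
    constructor
    · unfold pvProd
      rw [show ((0 : Nat) : Int) = 0 from rfl, PySem.List.pyRange_one_eq_nil (by omega)]
      simp
    · intro i hi; omega
  | succ t ih =>
    obtain ⟨⟨hm0, hmlt⟩, hbits⟩ := ih
    have hcast : ((t + 1 : Nat) : Int) = ((t : Nat) : Int) + 1 := by push_cast; ring
    have hsucc : ((t : Nat) : Int) + 1 = ((t + 1 : Nat) : Int) := by push_cast; ring
    have hunf : pvProd a b (t + 1)
        = (if (PySem.Int.band (a >>> ((t : Nat) : Int)) 1
              + PySem.Int.band (a >>> (((t : Nat) : Int) + 1)) 1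
              + PySem.Int.band (b >>> ((t : Nat) : Int)) 1
              + PySem.Int.band (b >>> (((t : Nat) : Int) + 1)) 1 == 1)
            then PySem.Int.bor (pvProd a b t) ((1 : Int) <<< ((t : Nat) : Int))
            else pvProd a b t) := by
      unfold pvProd
      rw [hcast, PySem.List.pyRange_one_succ_right (by omega : (0:Int) ≤ ((t : Nat) : Int)),
        List.foldl_append, List.foldl_cons, List.foldl_nil]
      rfl
    have hcond : (PySem.Int.band (a >>> ((t : Nat) : Int)) 1
          + PySem.Int.band (a >>> (((t : Nat) : Int) + 1)) 1
          + PySem.Int.band (b >>> ((t : Nat) : Int)) 1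
          + PySem.Int.band (b >>> (((t : Nat) : Int) + 1)) 1 == 1)
        = decide (pvTb a t + pvTb a (t+1) + pvTb b t + pvTb b (t+1) = 1) := by
      rw [hsucc, pv_band_shift_int a t ha, pv_band_shift_int a (t+1) ha,
        pv_band_shift_int b t hb, pv_band_shift_int b (t+1) hb]
      by_cases h : pvTb a t + pvTb a (t+1) + pvTb b t + pvTb b (t+1) = 1 <;> simp [h]
    have hbor : PySem.Int.bor (pvProd a b t) ((1 : Int) <<< ((t : Nat) : Int))
        = pvProd a b t + 1 * 2 ^ t := by
      exact pv_bor_shift_int (pvProd a b t) 1 t hm0 hmlt (Or.inr rfl)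
    set bit : Int := if decide (pvTb a t + pvTb a (t+1) + pvTb b t + pvTb b (t+1) = 1) then 1 else 0
      with hbitd
    have hbit01 : bit = 0 ∨ bit = 1 := by rw [hbitd]; split <;> simp
    have hval : pvProd a b (t + 1) = pvProd a b t + bit * 2 ^ t := by
      rw [hunf, hcond, hbor, hbitd]
      split <;> ring
    have hth := pvTb_add_high (pvProd a b t) bit t hm0 hmlt hbit01
    rw [hval]
    refine ⟨⟨by rcases hbit01 with h | h <;> rw [h] <;> nlinarith,
      by
        have h2 : (2:Int) ^ (t+1) = 2 * 2 ^ t := by ring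
        rcases hbit01 with h | h <;> rw [h] <;> nlinarith⟩, ?_⟩
    intro i hi
    by_cases hit : i < t
    · rw [hth.1 i hit, hbits i hit]
    · have : i = t := by omega
      rw [this, hth.2]

theorem pv_indicator_eq (p q : Bool) (h : (if p then (1:Int) else 0) = if q then 1 else 0) :
    p = q := by
  cases p <;> cases q <;> simp_all

-- pair (a, b) produces exactly column j iff every window matches the target cells
theorem pvProd_eq_mask (g : List (List Bool)) (j a b : Int) (ha : 0 ≤ a) (hb : 0 ≤ b) :
    (pvProd a b g.length == pvMaskF g j)
      = (List.range g.length).all (fun i => pvWin a b i (i + 1) ((pvColL g j).getD i false)) := by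
  obtain ⟨⟨hp0, hplt⟩, hpbits⟩ := pvProd_spec a b ha hb g.length
  obtain ⟨⟨hm0, hmlt⟩, hmbits⟩ := pvMaskP_spec g j g.length (le_refl _)
  rw [Bool.eq_iff_iff, beq_iff_eq, List.all_eq_true]
  have hpow := pv_pow_cast g.length
  have hPbit : ∀ i, i < g.length →
      ((pvProd a b g.length).toNat.testBit i
        = decide (pvTb a i + pvTb a (i+1) + pvTb b i + pvTb b (i+1) = 1)) := by
    intro i hi
    have h := hpbits i hi
    unfold pvTb at h
    exact pv_indicator_eq _ _ h
  have hMbit : ∀ i, i < g.length →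
      ((pvMaskF g j).toNat.testBit i = (pvColL g j).getD i false) := by
    intro i hi
    have h := hmbits i hi
    unfold pvTb at h
    exact pv_indicator_eq _ _ h
  constructor
  · intro heq i hi
    rw [List.mem_range] at hi
    unfold pvWin
    have h1 := hPbit i hi
    have h2 := hMbit i hi
    rw [heq, h2] at h1
    rw [← h1]
    simp
  · intro hall
    have htb : ∀ i : Nat, (pvProd a b g.length).toNat.testBit i = (pvMaskF g j).toNat.testBit i := by
      intro i
      by_cases hi : i < g.length
      · rw [hPbit i hi, hMbit i hi]
        have := hall i (List.mem_range.mpr hi)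
        unfold pvWin at this
        exact (beq_iff_eq.mp this)
      · have hle : (2:Nat) ^ g.length ≤ 2 ^ i := Nat.pow_le_pow_right (by omega) (by omega)
        have hlt1 : (pvProd a b g.length).toNat < 2 ^ i := by omega
        have hlt2 : (pvMaskF g j).toNat < 2 ^ i := by unfold pvMaskF; omega
        rw [Nat.testBit_lt_two_pow hlt1, Nat.testBit_lt_two_pow hlt2]
    have := Nat.eq_of_testBit_eq htb
    have hm0' : (0:Int) ≤ pvMaskF g j := hm0
    omega

-- the stream of all pairs with their produced column, and the grouped table
def pvStream (h : Nat) : List (Int × (Int × Int)) :=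
  (PySem.List.pyRange 0 ((1 : Int) <<< (h + 1)) 1).flatMap (fun a =>
    (PySem.List.pyRange 0 ((1 : Int) <<< (h + 1)) 1).map (fun b => (pvProd a b h, (a, b))))

def pvPairsD (h : Nat) : PySem.Dict Int (List (Int × Int)) :=
  pvGroupL (pvStream h) PySem.Dict.empty

-- one dense-vector column step of B
def pvVstep (g : List (List Bool)) (vec : List Int) (c : Int) : List Int :=
  ((pvPairsD g.length).getD c []).foldl (fun new ab =>
    new.set ab.2.toNat (new.getD ab.2.toNat 0 + vec.getD ab.1.toNat 0))
    (List.replicate (2 ^ (g.length + 1)) 0)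

def pvRunV (g : List (List Bool)) : List Int :=
  ((PySem.List.pyRange 0 ((PySem.List.pyGetD g 0 []).length : Int) 1).map
      (fun j => pvMaskF g j)).foldl
    (fun vec c => pvVstep g vec c) (List.replicate (2 ^ (g.length + 1)) 1)

-- port B computes the pipeline above
theorem pv_solution_alt_eq (g : List (List Bool)) : solution_alt g = (pvRunV g).sum := by
  have hpairs : ((PySem.List.pyRange 0 ((1 : Int) <<< (g.length + 1)) 1).foldl (fun pairs a =>
      (PySem.List.pyRange 0 ((1 : Int) <<< (g.length + 1)) 1).foldl (fun pairs b =>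
        let c :=
          (PySem.List.pyRange 0 (g.length : Int) 1).foldl (fun c i =>
            if (PySem.Int.band (a >>> i.toNat) 1 + PySem.Int.band (a >>> (i.toNat + 1)) 1
                + PySem.Int.band (b >>> i.toNat) 1 + PySem.Int.band (b >>> (i.toNat + 1)) 1 == 1) then
              PySem.Int.bor c ((1 : Int) <<< i.toNat)
            else c) 0
        if pairs.contains c then pairs.insert c (pairs.getD c [] ++ [(a, b)])
        else pairs.insert c [(a, b)]) pairs) PySem.Dict.empty) = pvPairsD g.length := by
    unfold pvPairsD pvStream
    rw [pvGroupL_flatMap]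
    refine PySem.List.foldl_congr_mem _ _ _ _ ?_
    intro acc a _
    unfold pvGroupL
    rw [List.foldl_map]
    rfl
  show ((((PySem.List.pyRange 0 ((PySem.List.pyGetD g 0 []).length : Int) 1).map (fun j =>
      (PySem.List.pyRange 0 (g.length : Int) 1).foldl (fun s i =>
        if PySem.List.pyGetD (PySem.List.pyGetD g i []) j false then s + ((1 : Int) <<< i.toNat)
        else s) 0)).foldl (fun vec c =>
        (((PySem.List.pyRange 0 ((1 : Int) <<< (g.length + 1)) 1).foldl (fun pairs a =>
          (PySem.List.pyRange 0 ((1 : Int) <<< (g.length + 1)) 1).foldl (fun pairs b =>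
            let c :=
              (PySem.List.pyRange 0 (g.length : Int) 1).foldl (fun c i =>
                if (PySem.Int.band (a >>> i.toNat) 1 + PySem.Int.band (a >>> (i.toNat + 1)) 1
                    + PySem.Int.band (b >>> i.toNat) 1 + PySem.Int.band (b >>> (i.toNat + 1)) 1 == 1) then
                  PySem.Int.bor c ((1 : Int) <<< i.toNat)
                else c) 0
            if pairs.contains c then pairs.insert c (pairs.getD c [] ++ [(a, b)])
            else pairs.insert c [(a, b)]) pairs) PySem.Dict.empty).getD c []).foldl (fun new ab =>
          new.set ab.2.toNat (new.getD ab.2.toNat 0 + vec.getD ab.1.toNat 0))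
          (List.replicate ((1 : Int) <<< (g.length + 1)).toNat 0))
        (List.replicate ((1 : Int) <<< (g.length + 1)).toNat 1)).sum)
    = (pvRunV g).sum
  rw [hpairs, pvN_toNat g.length]
  rfl

-- ---- evaluating one vector step ----

theorem pv_vecfold_len (vec : List Int) (L : List (Int × Int)) :
    ∀ v0 : List Int,
      (L.foldl (fun new ab =>
        new.set ab.2.toNat (new.getD ab.2.toNat 0 + vec.getD ab.1.toNat 0)) v0).length
      = v0.length := by
  induction L with
  | nil => intro v0; rfl
  | cons ab L ih =>
    intro v0
    rw [List.foldl_cons, ih]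
    exact List.length_set ..

theorem pv_vecAcc_getD (vec : List Int) :
    ∀ (L : List (Int × Int)) (v0 : List Int) (k : Nat),
      (∀ ab ∈ L, ab.2.toNat < v0.length) →
      (L.foldl (fun new ab =>
          new.set ab.2.toNat (new.getD ab.2.toNat 0 + vec.getD ab.1.toNat 0)) v0).getD k 0
        = v0.getD k 0
          + ((L.filter (fun ab => ab.2.toNat == k)).map (fun ab => vec.getD ab.1.toNat 0)).sum := by
  intro L
  induction L with
  | nil => intro v0 k _; simp
  | cons ab L ih =>
    intro v0 k hmem
    have hb : ab.2.toNat < v0.length := hmem ab (by simp)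
    rw [List.foldl_cons]
    rw [ih _ k (by
      intro p hp
      rw [List.length_set]
      exact hmem p (by simp [hp]))]
    have hgetset : ∀ m : Nat,
        (v0.set ab.2.toNat (v0.getD ab.2.toNat 0 + vec.getD ab.1.toNat 0)).getD m 0
          = if ab.2.toNat = m then v0.getD ab.2.toNat 0 + vec.getD ab.1.toNat 0
            else v0.getD m 0 := by
      intro m
      rw [List.getD_eq_getElem?_getD, List.getElem?_set]
      by_cases hm : ab.2.toNat = m
      · rw [if_pos hm, if_pos hm, if_pos (by omega)]
        simp
      · rw [if_neg hm, if_neg hm, List.getD_eq_getElem?_getD]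
    by_cases hk : ab.2.toNat = k
    · subst hk
      rw [hgetset, if_pos rfl, List.filter_cons, if_pos (by simp)]
      simp only [List.map_cons, List.sum_cons]
      ring
    · rw [hgetset, if_neg hk, List.filter_cons, if_neg (by simpa using hk)]

theorem pv_filter_range_single (n k : Nat) (Q : Nat → Bool) :
    (List.range n).filter (fun m => Q m && (m == k)) = if k < n ∧ Q k then [k] else [] := by
  induction n with
  | zero => simp
  | succ n ih =>
    rw [List.range_succ, List.filter_append, ih]
    by_cases hnk : n = k
    · subst hnk
      rw [if_neg (by omega)]
      by_cases hQ : Q n = true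
      · rw [if_pos ⟨by omega, hQ⟩]
        simp [hQ]
      · have hQ' : Q n = false := by simpa using hQ
        rw [if_neg (by simp [hQ'])]
        simp [hQ']
    · have h2 : (n == k) = false := by simpa using hnk
      have hstep : [n].filter (fun m => Q m && (m == k)) = [] := by simp [h2]
      rw [hstep, List.append_nil]
      by_cases hkn : k < n
      · by_cases hQ : Q k = true
        · rw [if_pos ⟨hkn, hQ⟩, if_pos ⟨by omega, hQ⟩]
        · have hQ' : Q k = false := by simpa using hQ
          rw [if_neg (by simp [hQ']), if_neg (by simp [hQ'])]
      · rw [if_neg (by omega), if_neg (by omega)]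

theorem pv_sum_pyRange (N : Nat) (F : Int → Int) :
    ((PySem.List.pyRange 0 ((N : Nat) : Int) 1).map F).sum
      = ∑ m ∈ Finset.range N, F ((m : Nat) : Int) := by
  rw [PySem.List.pyRange_one, List.map_map]
  have hN : (((N : Nat) : Int) - 0).toNat = N := by omega
  rw [hN]
  clear hN
  induction N with
  | zero => simp
  | succ n ih =>
    rw [List.range_succ, List.map_append, List.sum_append, Finset.sum_range_succ, ih]
    simp

theorem pv_sum_filter_map_flatMap' {α β : Type} (l : List α) (f : α → List β)
    (q : β → Bool) (v : β → Int) :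
    (((l.flatMap f).filter q).map v).sum
      = (l.map (fun x => (((f x).filter q).map v).sum)).sum := by
  induction l with
  | nil => simp
  | cons x xs ih => simp [List.flatMap_cons, List.filter_append, List.map_append, ih]

theorem pv_list_sum_getD (l : List Int) :
    l.sum = ∑ k ∈ Finset.range l.length, l.getD k 0 := by
  induction l with
  | nil => simp
  | cons x xs ih =>
    rw [List.sum_cons, List.length_cons, Finset.sum_range_succ', ih]
    simp [List.getD_cons_succ, List.getD_cons_zero]
    ring

theorem pvVstep_getD (g : List (List Bool)) (vec : List Int) (c : Int) (k : Nat)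
    (hk : k < 2 ^ (g.length + 1)) :
    (pvVstep g vec c).getD k 0
      = ∑ m ∈ Finset.range (2 ^ (g.length + 1)),
          (if pvProd ((m : Nat) : Int) ((k : Nat) : Int) g.length == c then vec.getD m 0 else 0) := by
  have hmem : ∀ ab ∈ (pvPairsD g.length).getD c [],
      ab.2.toNat < (List.replicate (2 ^ (g.length + 1)) (0 : Int)).length := by
    intro ab hab
    rw [List.length_replicate]
    unfold pvPairsD at hab
    rw [pvGroupL_getD, PySem.Dict.getD_empty, List.nil_append] at hab
    obtain ⟨p, hp, rfl⟩ := List.mem_map.mp hab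
    have hpstream : p ∈ pvStream g.length := (List.mem_filter.mp hp).1
    unfold pvStream at hpstream
    obtain ⟨a, _, hmap⟩ := List.mem_flatMap.mp hpstream
    obtain ⟨b, hbmem, rfl⟩ := List.mem_map.mp hmap
    have hb := PySem.List.mem_pyRange_one.mp hbmem
    have hN := pvN_toNat g.length
    show b.toNat < 2 ^ (g.length + 1)
    omega
  unfold pvVstep
  rw [pv_vecAcc_getD vec _ _ k hmem]
  have hz : (List.replicate (2 ^ (g.length + 1)) (0 : Int)).getD k 0 = 0 := by
    rw [List.getD_eq_getElem?_getD, List.getElem?_replicate]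
    split <;> rfl
  rw [hz, zero_add]
  have hL : (pvPairsD g.length).getD c []
      = ((pvStream g.length).filter (fun p => p.1 == c)).map (fun p => p.2) := by
    unfold pvPairsD
    rw [pvGroupL_getD, PySem.Dict.getD_empty, List.nil_append]
  rw [hL, List.filter_map, List.map_map, List.filter_filter]
  unfold pvStream
  rw [pv_sum_filter_map_flatMap']
  have hM : (((1 : Int) <<< (g.length + 1)) - 0).toNat = 2 ^ (g.length + 1) := by
    rw [Int.sub_zero, pvN_toNat]
  have hinner : ∀ a ∈ PySem.List.pyRange 0 ((1 : Int) <<< (g.length + 1)) 1,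
      ((((PySem.List.pyRange 0 ((1 : Int) <<< (g.length + 1)) 1).map
          (fun b => (pvProd a b g.length, (a, b)))).filter
          (fun p => ((fun ab : Int × Int => ab.2.toNat == k) ∘ fun p : Int × (Int × Int) => p.2) p
            && (p.1 == c))).map
          ((fun ab : Int × Int => vec.getD ab.1.toNat 0) ∘ fun p : Int × (Int × Int) => p.2)).sum
        = (if pvProd a ((k : Nat) : Int) g.length == c then vec.getD a.toNat 0 else 0) := by
    intro a _
    rw [List.filter_map, List.map_map, PySem.List.pyRange_one, List.filter_map, List.map_map, hM]
    have hpred : ∀ m ∈ List.range (2 ^ (g.length + 1)),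
        (((fun p : Int × Int × Int =>
            ((fun ab : Int × Int => ab.2.toNat == k) ∘ fun p : Int × (Int × Int) => p.2) p
              && (p.1 == c))
          ∘ (fun b => (pvProd a b g.length, (a, b)))) ∘ (fun m : Nat => (0 : Int) + (m : Int))) m
        = ((fun m : Nat => pvProd a ((m : Nat) : Int) g.length == c) m && (m == k)) := by
      intro m _
      simp only [Function.comp_def, zero_add, Int.toNat_natCast]
      exact Bool.and_comm _ _
    rw [List.filter_congr hpred,
      pv_filter_range_single (2 ^ (g.length + 1)) k (fun m => pvProd a ((m : Nat) : Int) g.length == c)]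
    by_cases hQ : (pvProd a ((k : Nat) : Int) g.length == c) = true
    · rw [if_pos ⟨hk, hQ⟩, if_pos hQ]
      simp [Function.comp_def]
    · have hQ' : (pvProd a ((k : Nat) : Int) g.length == c) = false := by simpa using hQ
      rw [if_neg (by simp [hQ']), if_neg (by simp [hQ'])]
      simp
  rw [List.map_congr_left hinner, pvN_eq g.length, pv_sum_pyRange (2 ^ (g.length + 1))]
  refine Finset.sum_congr rfl (fun m _ => ?_)
  rw [Int.toNat_natCast]

-- ---- the joint invariant between A's dict and B's vector ----

def pvJv (h : Nat) (dA : PySem.Dict Int Int) (vec : List Int) : Prop :=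
  dA.keys.Nodup ∧
  (∀ k ∈ dA.keys, ∃ n : Nat, n < 2 ^ (h + 1) ∧ k = (n : Int)) ∧
  vec.length = 2 ^ (h + 1) ∧
  ∀ u : Nat, u < 2 ^ (h + 1) → dA.getD (u : Int) 0 = vec.getD (pvRev (h + 1) u) 0

-- the transition conditions of the two sides agree through the bit reversal
theorem pv_cond_bridge (g : List (List Bool)) (j : Int) (u y : Nat)
    (hu : u < 2 ^ (g.length + 1)) (hy : y < 2 ^ (g.length + 1)) :
    (pvProd ((pvRev (g.length + 1) u : Nat) : Int) ((pvRev (g.length + 1) y : Nat) : Int) g.length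
        == pvMaskF g j)
      = pvAval (pvColL g j) (u : Int) (y : Int) := by
  have hc := pvColL_length g j
  rw [pvProd_eq_mask g j _ _ (by positivity) (by positivity)]
  have hav := pv_aval_bval (pvColL g j) u y (by rw [hc]; exact hu) (by rw [hc]; exact hy)
  rw [hc] at hav
  rw [hav]
  unfold pvBval
  rw [hc]
  have hb1 : pvBound ((pvRev (g.length + 1) u : Nat) : Int) (g.length + 1) = true := by
    rw [pvBound_natCast]
    simpa using pvRev_lt (g.length + 1) u
  have hb2 : pvBound ((pvRev (g.length + 1) y : Nat) : Int) (g.length + 1) = true := by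
    rw [pvBound_natCast]
    simpa using pvRev_lt (g.length + 1) y
  rw [hb1, hb2]
  simp

theorem pvJv_step (r0 : List Bool) (rest : List (List Bool)) (j : Int)
    (dA : PySem.Dict Int Int) (vec : List Int)
    (hJ : pvJv (r0 :: rest).length dA vec) :
    pvJv (r0 :: rest).length (pvStepA (r0 :: rest) j dA)
      (pvVstep (r0 :: rest) vec (pvMaskF (r0 :: rest) j)) := by
  obtain ⟨hnd, hkA, hlen, hEq⟩ := hJ
  refine ⟨pvStepA_nodup _ _ _, fun k hk => pvStepA_keys r0 rest j dA k hk, ?_, ?_⟩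
  · unfold pvVstep
    rw [pv_vecfold_len, List.length_replicate]
  · intro y hy
    rw [pvStepA_getD _ _ _ hnd, pv_sum_keys dA hnd _ hkA,
      pvVstep_getD _ _ _ _ (pvRev_lt _ y)]
    calc ∑ n ∈ Finset.range (2 ^ ((r0 :: rest).length + 1)),
          dA.getD (n : Int) 0 * (((generate_cols (r0 :: rest) j).count ((n : Int), (y : Int))) : Int)
        = ∑ n ∈ Finset.range (2 ^ ((r0 :: rest).length + 1)),
            dA.getD (n : Int) 0 * (if pvAval (pvColL (r0 :: rest) j) (n : Int) (y : Int) then 1 else 0) := by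
          refine Finset.sum_congr rfl (fun n _ => ?_)
          rw [pv_count_cast_A]
      _ = _ := by
          refine pv_sum_rev (r0 :: rest).length _ _ ?_
          intro u hu
          rw [pv_cond_bridge (r0 :: rest) j u y hu hy, hEq u hu]
          by_cases hv : pvAval (pvColL (r0 :: rest) j) (u : Int) (y : Int) = true
          · rw [hv]
            simp
          · have hv' : pvAval (pvColL (r0 :: rest) j) (u : Int) (y : Int) = false := by simpa using hv
            rw [hv']
            simp

theorem pvJv0 (r0 : List Bool) (rest : List (List Bool)) :
    pvJv (r0 :: rest).length (pvA0 (r0 :: rest))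
      (pvVstep (r0 :: rest) (List.replicate (2 ^ ((r0 :: rest).length + 1)) 1)
        (pvMaskF (r0 :: rest) 0)) := by
  refine ⟨pvA0_nodup _, fun k hk => pvA0_keys r0 rest k hk, ?_, ?_⟩
  · unfold pvVstep
    rw [pv_vecfold_len, List.length_replicate]
  · intro y hy
    have hone : ∀ m : Nat, m < 2 ^ ((r0 :: rest).length + 1) →
        (List.replicate (2 ^ ((r0 :: rest).length + 1)) (1 : Int)).getD m 0 = 1 := by
      intro m hm
      rw [List.getD_eq_getElem?_getD, List.getElem?_replicate, if_pos hm]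
      rfl
    rw [pvA0_getD, pvVstep_getD _ _ _ _ (pvRev_lt _ y)]
    rw [pv_countP_snd _ (2 ^ ((r0 :: rest).length + 1)) (fun p hp => by
      have hbd := (pv_pairs_mem_bound r0 rest 0 p hp).1
      have hpow := pv_pow_cast ((r0 :: rest).length + 1)
      exact ⟨p.1.toNat, by omega, by omega⟩)]
    calc ∑ n ∈ Finset.range (2 ^ ((r0 :: rest).length + 1)),
          (((generate_cols (r0 :: rest) 0).count ((n : Int), (y : Int))) : Int)
        = ∑ n ∈ Finset.range (2 ^ ((r0 :: rest).length + 1)),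
            (if pvAval (pvColL (r0 :: rest) 0) (n : Int) (y : Int) then (1 : Int) else 0) := by
          refine Finset.sum_congr rfl (fun n _ => ?_)
          rw [pv_count_cast_A]
      _ = _ := by
          refine pv_sum_rev (r0 :: rest).length _ _ ?_
          intro u hu
          rw [pv_cond_bridge (r0 :: rest) 0 u y hu hy, hone (pvRev ((r0 :: rest).length + 1) u) (pvRev_lt _ u)]

theorem pv_loopv (r0 : List Bool) (rest : List (List Bool)) (js : List Int) :
    ∀ (dA : PySem.Dict Int Int) (vec : List Int), pvJv (r0 :: rest).length dA vec →
    pvJv (r0 :: rest).length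
      (js.foldl (fun d i => pvStepA (r0 :: rest) i d) dA)
      (js.foldl (fun v j => pvVstep (r0 :: rest) v (pvMaskF (r0 :: rest) j)) vec) := by
  induction js with
  | nil => intro dA vec h; exact h
  | cons i is ih =>
    intro dA vec h
    simp only [List.foldl_cons]
    exact ih _ _ (pvJv_step r0 rest i dA vec h)

theorem pv_finalv (h : Nat) (dA : PySem.Dict Int Int) (vec : List Int)
    (hJ : pvJv h dA vec) :
    (dA.items.foldl (fun s kv => s + dA.getD kv.1 0) 0) = vec.sum := by
  obtain ⟨hnd, hkA, hlen, hEq⟩ := hJ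
  rw [PySem.List.foldl_add, zero_add, PySem.Dict.items_eq_map_keys dA hnd 0, List.map_map]
  simp only [Function.comp_def]
  have hA : (dA.keys.map (fun k => dA.getD k 0)).sum
      = (dA.keys.map (fun k => dA.getD k 0 * (fun _ => (1 : Int)) k)).sum := by
    congr 1
    refine List.map_congr_left (fun k _ => ?_)
    ring
  rw [hA, pv_sum_keys dA hnd (2 ^ (h + 1)) hkA, pv_list_sum_getD vec, hlen]
  refine pv_sum_rev h _ _ ?_
  intro m hm
  rw [hEq m hm]
  ring

-- ===== VERDICT (by name: the statement is the Claim_ definition above) =====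
theorem solution_spec : Claim_equal_solution := by
  intro g _ hpre
  unfold Spec_solution
  obtain ⟨hne, hhead, -⟩ := hpre
  cases g with
  | nil => exact absurd rfl hne
  | cons r0 rest =>
    have hw : r0 ≠ [] := by simpa using hhead
    rw [pv_solution_eq r0 rest hw, pv_solution_alt_eq (r0 :: rest)]
    apply pv_finalv
    have hget : PySem.List.pyGetD (r0 :: rest) 0 [] = r0 := by simp [pysem]
    unfold pvRunA pvRunV
    rw [hget, List.foldl_map]
    have hpos : (0 : Int) < (r0.length : Int) := by
      have : r0.length ≠ 0 := by simpa using hw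
      omega
    rw [PySem.List.pyRange_one_cons hpos, List.foldl_cons]
    simp only [zero_add]
    exact pv_loopv r0 rest _ _ _ (pvJv0 r0 rest)
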